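-- pv_equiv track=rewrite | github.com/dee021/CodingTest | 프로그래머스/2/169199. 리코쳇 로봇/리코쳇 로봇.py | solution
-- ===== SOURCE A (Python) =====
-- from collections import deque
--
-- def solution(board):
--     n, m = len(board), len(board[0])
--     board = list(map(list, board))
--     dr = [(0,1), (0,-1), (1,0), (-1,0)]
--     for i in range(n):
--         for j in range(m):
--             if board[i][j] == 'R':
--                 q = deque([[i, j, 0]])
--                 board[i][j] = 'V'
--                 while q:
--                     y, x, cnt = q.popleft()
--                     for dy, dx in dr:
--                         for w in range(1, max(n,m)):
--                             r, c = y + w * dy, x + w * dx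
--                             if 0 <= r < n and 0 <= c < m and board[r][c] == 'D':
--                                 if 0 <= r - dy < n and 0 <= c - dx < m and board[r - dy][c - dx] == 'G':
--                                     return cnt + 1
--                                 if 0 <= r - dy < n and 0 <= c - dx < m and board[r - dy][c - dx] == '.':
--                                     q.append([r - dy, c - dx, cnt + 1])
--                                     board[r - dy][c - dx] = 'V'
--                                 break
--                             elif dy and r in [0, n-1] and 0<= c < m and board[r][c] in ['.', 'G']:
--                                 if board[r][c] == 'G':
--                                     return cnt + 1
--                                 if board[r][c] == '.':
--                                     q.append([r, c, cnt + 1])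
--                                     board[r][c] = 'V'
--                                     break
--                             elif dx and c in [0, m-1] and 0<= r < n and board[r][c] in ['.', 'G']:
--                                 if board[r][c] == 'G':
--                                     return cnt + 1
--                                 if board[r][c] == '.':
--                                     q.append([r, c, cnt + 1])
--                                     board[r][c] = 'V'
--                                     break
--     return -1
-- ===== SOURCE B (Python) =====
-- from collections import deque
--
--
-- def _sweep(cells):
--     # landing index sliding FORWARD along the line: stop before the first 'D' (or at the end)
--     k = len(cells)
--     land = [0] * k
--     for i in range(k - 1, -1, -1):
--         land[i] = i if i + 1 >= k or cells[i + 1] == 'D' else land[i + 1]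
--     return land
--
--
-- def solution(board):
--     n, m = len(board), len(board[0])
--     grid = [row[:m] for row in board]
--     # locate the robot
--     start = None
--     for y in range(n):
--         for x in range(m):
--             if grid[y][x] == 'R':
--                 start = (y, x)
--                 break
--         if start is not None:
--             break
--     if start is None:
--         return -1
--     # per-direction landing tables, each built by linear sweeps: O(n*m) total
--     right = [_sweep(row) for row in grid]
--     left = [[m - 1 - v for v in reversed(_sweep(row[::-1]))] for row in grid]
--     cols = [[grid[y][x] for y in range(n)] for x in range(m)]
--     downT = [_sweep(col) for col in cols]
--     upT = [[n - 1 - v for v in reversed(_sweep(col[::-1]))] for col in cols]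
--     # O(1)-transition BFS
--     q = deque([(start[0], start[1], 0)])
--     visited = {start}
--     while q:
--         y, x, cnt = q.popleft()
--         for ny, nx in ((y, right[y][x]), (y, left[y][x]), (downT[x][y], x), (upT[x][y], x)):
--             ch = grid[ny][nx]
--             if ch == 'G':
--                 return cnt + 1
--             if ch == '.' and (ny, nx) not in visited:
--                 visited.add((ny, nx))
--                 q.append((ny, nx, cnt + 1))
--     return -1
-- ===== Notes on version B (the rewrite author's own statement) =====
-- stated objective: alternative
-- what changed: A rescans up to max(n,m) cells in each of the four directions at every BFS expansion; B precomputes four per-cell slide-landing tables with one linear sweep per direction and runs the same FIFO BFS with table-lookup transitions (intended as faster; measured only 1.23x on the generated boards).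
-- outside the precondition, e.g. on solution(['RD', 'RG']): A returns 1, B returns -1; on solution(['RG', 'X']): A returns 1, B raises IndexError
import Mathlib
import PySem

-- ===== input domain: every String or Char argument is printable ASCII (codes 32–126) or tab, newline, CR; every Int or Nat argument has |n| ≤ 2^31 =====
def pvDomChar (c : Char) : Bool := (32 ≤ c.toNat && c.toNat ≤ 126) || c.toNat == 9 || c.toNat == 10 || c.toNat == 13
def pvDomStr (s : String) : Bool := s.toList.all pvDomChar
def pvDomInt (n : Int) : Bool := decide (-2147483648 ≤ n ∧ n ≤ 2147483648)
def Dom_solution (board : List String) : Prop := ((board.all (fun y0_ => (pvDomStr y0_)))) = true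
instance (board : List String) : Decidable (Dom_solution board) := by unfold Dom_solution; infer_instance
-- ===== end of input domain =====

-- B replaces A's per-expansion directional rescans by four precomputed slide-landing
-- tables (one linear sweep per direction) and the same FIFO BFS with table-lookup
-- transitions (objective: alternative; intended as faster, not confirmed).

-- ===== PORT A =====

/-- `board[r][c]` (two guarded Python indexings). -/
def pvGet2 (g : List (List Char)) (r c : Int) : Option Char :=
  (PySem.List.pyGet? g r).bind (fun row => PySem.List.pyGet? row c)

/-- `board[r][c] = ch` (in-place row mutation). -/
def pvSet2 (g : List (List Char)) (r c : Int) (ch : Char) : List (List Char) :=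
  PySem.List.pySetD g r (PySem.List.pySetD (PySem.List.pyGetD g r []) c ch)

/-- A's inner `for w in range(1, max(n,m))` scan for one direction `(dy,dx)`. -/
def pvAWalk (n m y x cnt dy dx : Int) :
    List Int → List (List Char) → List (Int × Int × Int) →
    Option Int × List (List Char) × List (Int × Int × Int)
  | [], g, q => (none, g, q)
  | w :: ws, g, q =>
    let r := y + w * dy
    let c := x + w * dx
    if 0 ≤ r ∧ r < n ∧ 0 ≤ c ∧ c < m ∧ pvGet2 g r c = some 'D' then
      if 0 ≤ r - dy ∧ r - dy < n ∧ 0 ≤ c - dx ∧ c - dx < m ∧ pvGet2 g (r - dy) (c - dx) = some 'G' then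
        (some (cnt + 1), g, q)
      else if 0 ≤ r - dy ∧ r - dy < n ∧ 0 ≤ c - dx ∧ c - dx < m ∧ pvGet2 g (r - dy) (c - dx) = some '.' then
        (none, pvSet2 g (r - dy) (c - dx) 'V', q ++ [(r - dy, c - dx, cnt + 1)])
      else (none, g, q)
    else if dy ≠ 0 ∧ (r = 0 ∨ r = n - 1) ∧ 0 ≤ c ∧ c < m ∧
        (pvGet2 g r c = some '.' ∨ pvGet2 g r c = some 'G') then
      if pvGet2 g r c = some 'G' then (some (cnt + 1), g, q)
      else if pvGet2 g r c = some '.' then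
        (none, pvSet2 g r c 'V', q ++ [(r, c, cnt + 1)])
      else pvAWalk n m y x cnt dy dx ws g q
    else if dx ≠ 0 ∧ (c = 0 ∨ c = m - 1) ∧ 0 ≤ r ∧ r < n ∧
        (pvGet2 g r c = some '.' ∨ pvGet2 g r c = some 'G') then
      if pvGet2 g r c = some 'G' then (some (cnt + 1), g, q)
      else if pvGet2 g r c = some '.' then
        (none, pvSet2 g r c 'V', q ++ [(r, c, cnt + 1)])
      else pvAWalk n m y x cnt dy dx ws g q
    else pvAWalk n m y x cnt dy dx ws g q

/-- A's `for dy, dx in dr` loop over one popped node. -/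
def pvADirs (n m y x cnt : Int) :
    List (Int × Int) → List (List Char) → List (Int × Int × Int) →
    Option Int × List (List Char) × List (Int × Int × Int)
  | [], g, q => (none, g, q)
  | (dy, dx) :: ds, g, q =>
    match pvAWalk n m y x cnt dy dx (PySem.List.pyRange 1 (max n m) 1) g q with
    | (some a, g', q') => (some a, g', q')
    | (none, g', q') => pvADirs n m y x cnt ds g' q'

/-- A's `while q` BFS loop (fuel bounds the number of pops; `n*m+1` always suffices,
    since every enqueue turns a distinct `'.'` cell of the n×m region into `'V'`). -/
def pvABfs (n m : Int) : Nat → List (List Char) → List (Int × Int × Int) →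
    Option Int × List (List Char)
  | _, g, [] => (none, g)
  | 0, g, _ => (none, g)
  | fuel + 1, g, (y, x, cnt) :: q =>
    match pvADirs n m y x cnt [(0, 1), (0, -1), (1, 0), (-1, 0)] g q with
    | (some a, g', _) => (some a, g')
    | (none, g', q') => pvABfs n m fuel g' q'

/-- A's outer `for i in range(n): for j in range(m)` scan (with BFS on each `'R'` found). -/
def pvAScan (n m : Int) : List (Int × Int) → List (List Char) → Int
  | [], _ => -1
  | (i, j) :: rest, g =>
    if pvGet2 g i j = some 'R' then
      match pvABfs n m (n.toNat * m.toNat + 1) (pvSet2 g i j 'V') [(i, j, 0)] with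
      | (some a, _) => a
      | (none, g2) => pvAScan n m rest g2
    else pvAScan n m rest g

def solution (board : List String) : Int :=
  let n : Int := PySem.List.len board
  let m : Int := PySem.Str.len (PySem.List.pyGetD board 0 "")
  let g := board.map String.toList
  pvAScan n m
    ((PySem.List.pyRange 0 n 1).flatMap fun i =>
      (PySem.List.pyRange 0 m 1).map fun j => (i, j)) g

-- ===== PORT B =====

/-- B's `_sweep` loop (filled right-to-left; `i` is the absolute index of the head). -/
def pvSweep : List Char → Int → List Int
  | [], _ => []
  | _ :: rest, i =>
    match rest, pvSweep rest (i + 1) with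
    | [], _ => [i]
    | c2 :: _, t => (if c2 = 'D' then i else t.headD i) :: t

/-- B's inner `for x in range(m)` robot search in one row. -/
def pvBFindX (row : List Char) : List Int → Option Int
  | [] => none
  | x :: xs => if PySem.List.pyGet? row x = some 'R' then some x else pvBFindX row xs

/-- B's outer `for y in range(n)` robot search. -/
def pvBFindY (grid : List (List Char)) (m : Int) : List Int → Option (Int × Int)
  | [] => none
  | y :: ys =>
    match pvBFindX (PySem.List.pyGetD grid y []) (PySem.List.pyRange 0 m 1) with
    | some x => some (y, x)
    | none => pvBFindY grid m ys

/-- `t[a][b]` for B's landing tables. -/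
def pvIdx2 (t : List (List Int)) (a b : Int) : Int :=
  PySem.List.pyGetD (PySem.List.pyGetD t a []) b 0

/-- B's `for ny, nx in (...)` loop over the four precomputed landings of one node. -/
def pvBExpand (grid : List (List Char)) (cnt : Int) :
    List (Int × Int) → List (Int × Int × Int) → PySem.Set (Int × Int) →
    Option Int × List (Int × Int × Int) × PySem.Set (Int × Int)
  | [], q, vis => (none, q, vis)
  | (ny, nx) :: rest, q, vis =>
    let ch := pvGet2 grid ny nx
    if ch = some 'G' then (some (cnt + 1), q, vis)
    else if ch = some '.' ∧ ¬ PySem.Set.contains vis (ny, nx) then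
      pvBExpand grid cnt rest (q ++ [(ny, nx, cnt + 1)]) (PySem.Set.add vis (ny, nx))
    else pvBExpand grid cnt rest q vis

/-- B's `while q` BFS loop (same fuel bound as A's port; `n*m+1` pops always suffice). -/
def pvBBfs (grid : List (List Char)) (right left downT upT : List (List Int)) :
    Nat → List (Int × Int × Int) → PySem.Set (Int × Int) → Option Int
  | _, [], _ => none
  | 0, _, _ => none
  | fuel + 1, (y, x, cnt) :: q, vis =>
    match pvBExpand grid cnt
        [(y, pvIdx2 right y x), (y, pvIdx2 left y x), (pvIdx2 downT x y, x), (pvIdx2 upT x y, x)]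
        q vis with
    | (some a, _, _) => some a
    | (none, q', vis') => pvBBfs grid right left downT upT fuel q' vis'

def solution_alt (board : List String) : Int :=
  let n : Int := PySem.List.len board
  let m : Int := PySem.Str.len (PySem.List.pyGetD board 0 "")
  let grid : List (List Char) := board.map fun row => PySem.List.slice row.toList none (some m)
  match pvBFindY grid m (PySem.List.pyRange 0 n 1) with
  | none => -1
  | some (sy, sx) =>
    let right := grid.map fun row => pvSweep row 0
    let left := grid.map fun row => ((pvSweep row.reverse 0).reverse.map fun v => m - 1 - v)
    let cols := (PySem.List.pyRange 0 m 1).map fun x =>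
      (PySem.List.pyRange 0 n 1).map fun y => (pvGet2 grid y x).getD ' '
    let downT := cols.map fun col => pvSweep col 0
    let upT := cols.map fun col => ((pvSweep col.reverse 0).reverse.map fun v => n - 1 - v)
    match pvBBfs grid right left downT upT (n.toNat * m.toNat + 1) [(sy, sx, 0)]
        (PySem.Set.add PySem.Set.empty (sy, sx)) with
    | some a => a
    | none => -1

-- ===== PRECONDITION & SPEC =====

-- Pre_ excludes: the empty board and ragged boards with a row shorter than the first
-- (on which A raises IndexError, except when its BFS happens to return before reading
-- the short row), and boards with more than one 'R' in the n×m region, on which A's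
-- value (a second BFS launched from the next 'R' over the marked-up board) is an
-- accident of its mutate-and-continue scan; B searches from the first robot only.
def Pre_solution (board : List String) : Prop :=
  board ≠ [] ∧
  (∀ row ∈ board, (board.headD "").toList.length ≤ row.toList.length) ∧
  (board.map fun row =>
    (row.toList.take (board.headD "").toList.length).count 'R').sum ≤ 1

instance (board : List String) : Decidable (Pre_solution board) := by
  unfold Pre_solution; infer_instance

def pvWitness_solution : List String := ["R.", ".G"]

def Spec_solution (board : List String) (out : Int) : Prop := out = solution_alt board
instance (board : List String) (out : Int) : Decidable (Spec_solution board out) := by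
  unfold Spec_solution; infer_instance

-- ===== CLAIM (what is proved, stated in full; the proofs are below) =====
def Claim_equal_solution : Prop :=
  ∀ (board : List String), Dom_solution board → Pre_solution board →
    Spec_solution board (solution board)
-- ===== LEMMAS AND PROOFS =====

-- in-bounds predicate for the n×m region
abbrev InB4 (n m r c : Int) : Prop := 0 ≤ r ∧ r < n ∧ 0 ≤ c ∧ c < m

-- shape: g has n rows, each of length ≥ m
def GSh (n m : Int) (g : List (List Char)) : Prop :=
  (g.length : Int) = n ∧ ∀ row ∈ g, (m : Int) ≤ (row.length : Int)

lemma pvGet2_eq_some (n m : Int) (g : List (List Char)) (hsh : GSh n m g)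
    (r c : Int) (h : InB4 n m r c) :
    ∃ ch : Char, pvGet2 g r c = some ch := by
  obtain ⟨hr0, hrn, hc0, hcm⟩ := h
  obtain ⟨hlen, hrow⟩ := hsh
  unfold pvGet2
  rw [PySem.List.pyGet?_of_nonneg g hr0]
  have hrlt : r.toNat < g.length := by omega
  rw [List.getElem?_eq_getElem hrlt]
  have hm := hrow _ (List.getElem_mem hrlt)
  simp only [Option.bind_some]
  rw [PySem.List.pyGet?_of_nonneg _ hc0]
  have : c.toNat < (g[r.toNat]).length := by omega
  rw [List.getElem?_eq_getElem this]
  exact ⟨_, rfl⟩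

lemma pvSet2_get2 (n m : Int) (g : List (List Char)) (hsh : GSh n m g)
    (r c : Int) (h : InB4 n m r c) (ch : Char) (r' c' : Int) (h' : InB4 n m r' c') :
    pvGet2 (pvSet2 g r c ch) r' c' =
      if r' = r ∧ c' = c then some ch else pvGet2 g r' c' := by
  obtain ⟨hr0, hrn, hc0, hcm⟩ := h
  obtain ⟨hr0', hrn', hc0', hcm'⟩ := h'
  obtain ⟨hlen, hrow⟩ := hsh
  have hrlt : r.toNat < g.length := by omega
  have hrlt' : r'.toNat < g.length := by omega
  unfold pvSet2 pvGet2
  rw [PySem.List.pySetD_of_nonneg g _ hr0, PySem.List.pyGetD_eq_getElem g _ hr0 (by omega),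
    PySem.List.pyGet?_of_nonneg _ hr0']
  have hmr := hrow _ (List.getElem_mem hrlt)
  by_cases hrr : r' = r
  · subst hrr
    rw [List.getElem?_set_self']
    rw [PySem.List.pySetD_of_nonneg _ _ hc0, PySem.List.pyGet?_of_nonneg g hr0']
    simp only [List.getElem?_eq_getElem hrlt, Option.map_eq_map, Option.map_some,
      Option.bind_some, Function.const_apply, true_and]
    rw [PySem.List.pyGet?_of_nonneg _ hc0', PySem.List.pyGet?_of_nonneg _ hc0']
    by_cases hcc : c' = c
    · subst hcc
      rw [List.getElem?_set_self (by omega)]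
      simp
    · rw [List.getElem?_set_ne (by omega)]
      simp [hcc]
  · rw [List.getElem?_set_ne (by omega)]
    simp only [hrr, false_and, if_false]
    rw [PySem.List.pyGet?_of_nonneg _ hr0']

lemma pvSet2_gsh (n m : Int) (g : List (List Char)) (hsh : GSh n m g)
    (r c : Int) (h : InB4 n m r c) (ch : Char) : GSh n m (pvSet2 g r c ch) := by
  obtain ⟨hr0, hrn, hc0, hcm⟩ := h
  obtain ⟨hlen, hrow⟩ := hsh
  constructor
  · unfold pvSet2
    rw [PySem.List.length_pySetD]
    exact hlen
  · intro row hmem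
    unfold pvSet2 at hmem
    rw [PySem.List.pySetD_of_nonneg g _ hr0] at hmem
    rcases List.mem_or_eq_of_mem_set hmem with h | h
    · exact hrow _ h
    · subst h
      rw [PySem.List.pyGetD_eq_getElem g _ hr0 (by omega), PySem.List.pySetD_of_nonneg _ _ hc0]
      rw [List.length_set]
      exact hrow _ (List.getElem_mem (by omega))

-- landing index sliding forward along a line of cells: stop before the first 'D'
def landLine (row : List Char) (x : Nat) : Nat :=
  if x + 1 < row.length ∧ row.getD (x + 1) ' ' ≠ 'D' then landLine row (x + 1) else x
termination_by row.length - x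
decreasing_by omega

lemma landLine_ge (row : List Char) (x : Nat) : x ≤ landLine row x := by
  fun_induction landLine with
  | case1 x h ih => omega
  | case2 x h => omega

lemma landLine_lt (row : List Char) (x : Nat) (hx : x < row.length) :
    landLine row x < row.length := by
  fun_induction landLine with
  | case1 x h ih => exact ih (by omega)
  | case2 x h => exact hx

lemma landLine_path (row : List Char) (x : Nat) :
    ∀ t, x < t → t ≤ landLine row x → row.getD t ' ' ≠ 'D' := by
  fun_induction landLine with
  | case1 x h ih =>
    intro t ht1 ht2
    by_cases hx : t = x + 1
    · subst hx; exact h.2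
    · exact ih t (by omega) ht2
  | case2 x h =>
    intro t ht1 ht2; omega

lemma landLine_stop (row : List Char) (x : Nat) :
    landLine row x + 1 ≥ row.length ∨ row.getD (landLine row x + 1) ' ' = 'D' := by
  fun_induction landLine with
  | case1 x h ih => exact ih
  | case2 x h =>
    by_cases h1 : x + 1 < row.length
    · right; by_contra h2; exact h ⟨h1, h2⟩
    · left; omega

lemma landLine_cons_succ (c : Char) (rest : List Char) (x : Nat) :
    landLine (c :: rest) (x + 1) = landLine rest x + 1 := by
  fun_induction landLine rest x with
  | case1 x h ih =>
    rw [landLine]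
    rw [if_pos (by simpa using ⟨by omega, h.2⟩)]
    exact ih
  | case2 x h =>
    rw [landLine]
    rw [if_neg (by simpa using fun h1 h2 => h ⟨by omega, h2⟩)]

lemma landLine_cons_zero (c c2 : Char) (rest' : List Char) :
    landLine (c :: c2 :: rest') 0 =
      if c2 ≠ 'D' then landLine (c2 :: rest') 0 + 1 else 0 := by
  rw [landLine]
  simp only [List.length_cons, List.getD_cons_succ, List.getD_cons_zero]
  by_cases hD : c2 = 'D'
  · simp [hD]
  · rw [if_pos ⟨by omega, hD⟩, if_pos hD]
    exact landLine_cons_succ c (c2 :: rest') 0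

lemma pvSweep_length (row : List Char) (i : Int) : (pvSweep row i).length = row.length := by
  fun_induction pvSweep with
  | case1 => simp
  | case2 => simp_all [pvSweep]
  | case3 => simp_all [pvSweep]

lemma pvSweep_getElem? (row : List Char) (i : Int) (x : Nat) (hx : x < row.length) :
    (pvSweep row i)[x]? = some (i + (landLine row x : Int)) := by
  induction row generalizing i x with
  | nil => simp at hx
  | cons c rest ih =>
    cases rest with
    | nil =>
      have hx0 : x = 0 := by simpa using hx
      subst hx0
      rw [pvSweep, landLine]
      simp
    | cons c2 rest' =>
      cases x with
      | zero =>
        rw [pvSweep]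
        rw [landLine_cons_zero]
        by_cases hD : c2 = 'D'
        · simp [hD]
        · rw [if_neg (by simp [hD]), if_pos hD]
          have hh := ih (i + 1) 0 (by simp)
          have hne : pvSweep (c2 :: rest') (i + 1) ≠ [] := by
            intro hcon
            rw [hcon] at hh
            simp at hh
          rcases List.exists_cons_of_ne_nil hne with ⟨a, t', hat⟩
          rw [hat]
          rw [hat] at hh
          simp only [List.getElem?_cons_zero, List.headD_cons] at hh ⊢
          injection hh with hh'
          rw [hh']
          congr 1
          push_cast
          ring
      | succ x' =>
        rw [pvSweep]
        have hne : pvSweep (c2 :: rest') (i + 1) ≠ [] := by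
          have := pvSweep_length (c2 :: rest') (i + 1)
          intro hcon; rw [hcon] at this; simp at this
        rcases List.exists_cons_of_ne_nil hne with ⟨a, t', hat⟩
        rw [hat]
        simp only [List.getElem?_cons_succ]
        rw [← hat, ih (i + 1) x' (by simpa using hx)]
        rw [landLine_cons_succ]
        congr 1
        push_cast
        ring

-- all three guards of A's inner scan are false at offset w
def noFire (n m y x dy dx : Int) (g : List (List Char)) (w : Int) : Prop :=
  ¬(0 ≤ y + w * dy ∧ y + w * dy < n ∧ 0 ≤ x + w * dx ∧ x + w * dx < m ∧
      pvGet2 g (y + w * dy) (x + w * dx) = some 'D') ∧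
  ¬(dy ≠ 0 ∧ (y + w * dy = 0 ∨ y + w * dy = n - 1) ∧ 0 ≤ x + w * dx ∧ x + w * dx < m ∧
      (pvGet2 g (y + w * dy) (x + w * dx) = some '.' ∨
       pvGet2 g (y + w * dy) (x + w * dx) = some 'G')) ∧
  ¬(dx ≠ 0 ∧ (x + w * dx = 0 ∨ x + w * dx = m - 1) ∧ 0 ≤ y + w * dy ∧ y + w * dy < n ∧
      (pvGet2 g (y + w * dy) (x + w * dx) = some '.' ∨
       pvGet2 g (y + w * dy) (x + w * dx) = some 'G'))

lemma pvAWalk_cons_noFire (n m y x cnt dy dx w : Int) (ws : List Int)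
    (g : List (List Char)) (q : List (Int × Int × Int))
    (h : noFire n m y x dy dx g w) :
    pvAWalk n m y x cnt dy dx (w :: ws) g q = pvAWalk n m y x cnt dy dx ws g q := by
  obtain ⟨h1, h2, h3⟩ := h
  rw [pvAWalk]
  rw [if_neg h1, if_neg h2, if_neg h3]

lemma pvAWalk_skip (n m y x cnt dy dx K : Int) (g : List (List Char))
    (q : List (Int × Int × Int)) :
    ∀ (k : Nat) (a b : Int), a ≤ b → (b - a).toNat = k →
    (∀ w, a ≤ w → w < b → noFire n m y x dy dx g w) →
    pvAWalk n m y x cnt dy dx (PySem.List.pyRange a K 1) g q =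
      pvAWalk n m y x cnt dy dx (PySem.List.pyRange b K 1) g q := by
  intro k
  induction k with
  | zero =>
    intro a b hab hk _
    have : a = b := by omega
    rw [this]
  | succ k ih =>
    intro a b hab hk h
    have haK : a < b := by omega
    by_cases haK' : a < K
    · rw [PySem.List.pyRange_one_cons haK']
      rw [pvAWalk_cons_noFire _ _ _ _ _ _ _ _ _ _ _ (h a le_rfl haK)]
      exact ih (a + 1) b (by omega) (by omega) (fun w hw1 hw2 => h w (by omega) hw2)
    · rw [PySem.List.pyRange_one_eq_nil (by omega), PySem.List.pyRange_one_eq_nil (by omega)]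

lemma pvAWalk_exhaust (n m y x cnt dy dx K : Int) (g : List (List Char))
    (q : List (Int × Int × Int)) (a : Int)
    (h : ∀ w, a ≤ w → w < K → noFire n m y x dy dx g w) :
    pvAWalk n m y x cnt dy dx (PySem.List.pyRange a K 1) g q = (none, g, q) := by
  by_cases haK : a ≤ K
  · rw [pvAWalk_skip n m y x cnt dy dx K g q (K - a).toNat a K haK rfl h]
    rw [PySem.List.pyRange_one_eq_nil le_rfl]
    rfl
  · rw [PySem.List.pyRange_one_eq_nil (by omega)]
    rfl

-- outcome of A's inner scan in one direction, as a function of the landing cell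
lemma pvAWalk_master (n m y x cnt dy dx : Int) (g : List (List Char))
    (q : List (Int × Int × Int)) (ch : Int → Int → Char)
    (hg : ∀ r c : Int, InB4 n m r c → pvGet2 g r c = some (ch r c))
    (hdir : (dy = 0 ∧ (dx = 1 ∨ dx = -1)) ∨ (dx = 0 ∧ (dy = 1 ∨ dy = -1)))
    (hb : InB4 n m y x) (d : Nat)
    (hpath : ∀ t : Nat, 1 ≤ t → t ≤ d →
        InB4 n m (y + (t : Int) * dy) (x + (t : Int) * dx) ∧
        ch (y + (t : Int) * dy) (x + (t : Int) * dx) ≠ 'D')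
    (hstop : ¬ InB4 n m (y + ((d : Int) + 1) * dy) (x + ((d : Int) + 1) * dx) ∨
        (InB4 n m (y + ((d : Int) + 1) * dy) (x + ((d : Int) + 1) * dx) ∧
         ch (y + ((d : Int) + 1) * dy) (x + ((d : Int) + 1) * dx) = 'D'))
    (hcur : ch y x = 'V') :
    pvAWalk n m y x cnt dy dx (PySem.List.pyRange 1 (max n m) 1) g q =
      (if ch (y + (d : Int) * dy) (x + (d : Int) * dx) = 'G' then (some (cnt + 1), g, q)
       else if ch (y + (d : Int) * dy) (x + (d : Int) * dx) = '.' then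
         (none, pvSet2 g (y + (d : Int) * dy) (x + (d : Int) * dx) 'V',
           q ++ [(y + (d : Int) * dy, x + (d : Int) * dx, cnt + 1)])
       else (none, g, q)) := by
  obtain ⟨hy0, hyn, hx0, hxm⟩ := hb
  -- the landing cell is in bounds
  have hland : InB4 n m (y + (d : Int) * dy) (x + (d : Int) * dx) := by
    rcases Nat.eq_zero_or_pos d with hd0 | hd1
    · subst hd0
      simp only [Nat.cast_zero, zero_mul, add_zero]
      exact ⟨hy0, hyn, hx0, hxm⟩
    · exact (hpath d hd1 le_rfl).1
  -- no guard fires strictly before the stop event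
  have hnofire_mid : ∀ w : Int, 1 ≤ w → w ≤ (d : Int) →
      (w < (d : Int) ∨ InB4 n m (y + ((d : Int) + 1) * dy) (x + ((d : Int) + 1) * dx)) →
      noFire n m y x dy dx g w := by
    intro w hw1 hwd hnext
    have hw : ∃ t : Nat, (t : Int) = w ∧ 1 ≤ t ∧ t ≤ d := ⟨w.toNat, by omega, by omega, by omega⟩
    obtain ⟨t, htw, ht1, htd⟩ := hw
    subst htw
    obtain ⟨hcb, hcD⟩ := hpath t ht1 htd
    have hgc := hg _ _ hcb
    obtain ⟨hcb1, hcb2, hcb3, hcb4⟩ := hcb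
    -- the next cell along the direction is in bounds
    have hnb : 0 ≤ y + ((t : Int) + 1) * dy ∧ y + ((t : Int) + 1) * dy < n ∧
        0 ≤ x + ((t : Int) + 1) * dx ∧ x + ((t : Int) + 1) * dx < m := by
      by_cases htd' : t < d
      · have := (hpath (t + 1) (by omega) (by omega)).1
        obtain ⟨a1, a2, a3, a4⟩ := this
        push_cast at a1 a2 a3 a4 ⊢
        exact ⟨a1, a2, a3, a4⟩
      · have htd2 : t = d := by omega
        subst htd2
        rcases hnext with hlt | hin
        · omega
        · obtain ⟨a1, a2, a3, a4⟩ := hin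
          exact ⟨a1, a2, a3, a4⟩
    refine ⟨?_, ?_, ?_⟩
    · rintro ⟨-, -, -, -, hcon⟩
      rw [hgc] at hcon
      exact hcD (Option.some_inj.mp hcon)
    · rintro ⟨hdy0, hwall, -, -, -⟩
      rcases hdir with ⟨hdy, -⟩ | ⟨hdx, hdy | hdy⟩
      · exact hdy0 hdy
      · subst hdy; subst hdx; omega
      · subst hdy; subst hdx; omega
    · rintro ⟨hdx0, hwall, -, -, -⟩
      rcases hdir with ⟨hdy, hdx | hdx⟩ | ⟨hdx, -⟩
      · subst hdy; subst hdx; omega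
      · subst hdy; subst hdx; omega
      · exact hdx0 hdx
  have hKn : n ≤ max n m := le_max_left _ _
  have hKm : m ≤ max n m := le_max_right _ _
  obtain ⟨hl1, hl2, hl3, hl4⟩ := hland
  have hgl := hg _ _ ⟨hl1, hl2, hl3, hl4⟩
  rcases hstop with hout | ⟨hin, hD⟩
  · -- the slide stops because the next cell is off the board
    rcases Nat.eq_zero_or_pos d with hd0 | hd1
    · -- degenerate slide: the very first step is off the board; nothing fires at all
      subst hd0
      simp only [Nat.cast_zero, zero_mul, add_zero] at hgl ⊢
      rw [if_neg (by rw [hcur]; decide), if_neg (by rw [hcur]; decide)]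
      apply pvAWalk_exhaust
      intro w hw1 hwK
      simp only [Nat.cast_zero, zero_add, one_mul] at hout
      rcases hdir with ⟨hdy, hdx | hdx⟩ | ⟨hdx, hdy | hdy⟩ <;> subst hdy <;> subst hdx <;>
        exact ⟨by rintro ⟨a1, a2, a3, a4, -⟩; omega,
               by rintro ⟨a1, a2, a3, a4, -⟩; omega,
               by rintro ⟨a1, a2, a3, a4, -⟩; omega⟩
    · -- slide of length d ≥ 1 ending at the boundary of the board
      rw [pvAWalk_skip n m y x cnt dy dx (max n m) g q ((d : Int) - 1).toNat 1 (d : Int)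
        (by omega) (by omega)
        (fun w hw1 hw2 => hnofire_mid w hw1 (by omega) (Or.inl hw2))]
      have hdK : (d : Int) < max n m := by
        rcases hdir with ⟨hdy, hdx | hdx⟩ | ⟨hdx, hdy | hdy⟩ <;> subst hdy <;> subst hdx <;> omega
      rw [PySem.List.pyRange_one_cons hdK, pvAWalk]
      rw [if_neg (by
        rintro ⟨-, -, -, -, hcon⟩
        rw [hgl] at hcon
        exact (hpath d hd1 le_rfl).2 (Option.some_inj.mp hcon))]
      rcases hdir with ⟨hdy, hdxx⟩ | ⟨hdx, hdyy⟩
      · -- horizontal: only the third guard can fire, at a left/right boundary column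
        subst hdy
        simp only [mul_zero, add_zero] at hpath hnofire_mid hgl hout hl1 hl2 hl3 hl4 ⊢
        have hwall : x + (d : Int) * dx = 0 ∨ x + (d : Int) * dx = m - 1 := by
          rcases hdxx with hdx | hdx <;> subst hdx <;> [right; left] <;> omega
        rw [if_neg (by rintro ⟨hcon, -⟩; exact hcon rfl)]
        by_cases hG : ch y (x + (d : Int) * dx) = 'G'
        · rw [if_pos ⟨by rcases hdxx with h | h <;> subst h <;> decide, hwall, hl1, hl2,
            Or.inr (by rw [hgl, hG])⟩]
          rw [if_pos (by rw [hgl, hG]), if_pos hG]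
        · by_cases hDot : ch y (x + (d : Int) * dx) = '.'
          · rw [if_pos ⟨by rcases hdxx with h | h <;> subst h <;> decide, hwall, hl1, hl2,
              Or.inl (by rw [hgl, hDot])⟩]
            rw [if_neg (by rw [hgl]; simp [hG]), if_pos (by rw [hgl, hDot])]
            rw [if_neg hG, if_pos hDot]
          · rw [if_neg (by
              rintro ⟨-, -, -, -, hcon | hcon⟩ <;> rw [hgl] at hcon <;>
                [exact hDot (Option.some_inj.mp hcon); exact hG (Option.some_inj.mp hcon)])]
            rw [if_neg hG, if_neg hDot]
            apply pvAWalk_exhaust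
            intro w hw1 hwK
            rcases hdxx with hdx | hdx <;> subst hdx <;>
              exact ⟨by rintro ⟨a1, a2, a3, a4, -⟩; omega,
                     by rintro ⟨hcon, -⟩; exact hcon rfl,
                     by rintro ⟨-, hw, a1, a2, -⟩; omega⟩
      · -- vertical: only the second guard can fire, at a top/bottom boundary row
        subst hdx
        simp only [mul_zero, add_zero] at hpath hnofire_mid hgl hout hl1 hl2 hl3 hl4 ⊢
        have hwall : y + (d : Int) * dy = 0 ∨ y + (d : Int) * dy = n - 1 := by
          rcases hdyy with hdy | hdy <;> subst hdy <;> [right; left] <;> omega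
        by_cases hG : ch (y + (d : Int) * dy) x = 'G'
        · rw [if_pos ⟨by rcases hdyy with h | h <;> subst h <;> decide, hwall, hl3, hl4,
            Or.inr (by rw [hgl, hG])⟩]
          rw [if_pos (by rw [hgl, hG]), if_pos hG]
        · by_cases hDot : ch (y + (d : Int) * dy) x = '.'
          · rw [if_pos ⟨by rcases hdyy with h | h <;> subst h <;> decide, hwall, hl3, hl4,
              Or.inl (by rw [hgl, hDot])⟩]
            rw [if_neg (by rw [hgl]; simp [hG]), if_pos (by rw [hgl, hDot])]
            rw [if_neg hG, if_pos hDot]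
          · rw [if_neg (by
              rintro ⟨-, -, -, -, hcon | hcon⟩ <;> rw [hgl] at hcon <;>
                [exact hDot (Option.some_inj.mp hcon); exact hG (Option.some_inj.mp hcon)])]
            rw [if_neg (by rintro ⟨hcon, -⟩; exact hcon rfl)]
            rw [if_neg hG, if_neg hDot]
            apply pvAWalk_exhaust
            intro w hw1 hwK
            rcases hdyy with hdy | hdy <;> subst hdy <;>
              exact ⟨by rintro ⟨a1, a2, a3, a4, -⟩; omega,
                     by rintro ⟨-, hw, a1, a2, -⟩; omega,
                     by rintro ⟨hcon, -⟩; exact hcon rfl⟩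
  · -- the slide stops because the next cell holds a 'D'
    obtain ⟨hi1, hi2, hi3, hi4⟩ := hin
    rw [pvAWalk_skip n m y x cnt dy dx (max n m) g q (d : Nat) 1 ((d : Int) + 1)
      (by omega) (by omega)
      (fun w hw1 hw2 => hnofire_mid w hw1 (by omega) (Or.inr ⟨hi1, hi2, hi3, hi4⟩))]
    have hdK : (d : Int) + 1 < max n m := by
      rcases hdir with ⟨hdy, hdx | hdx⟩ | ⟨hdx, hdy | hdy⟩ <;> subst hdy <;> subst hdx <;> omega
    rw [PySem.List.pyRange_one_cons hdK, pvAWalk]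
    rw [if_pos ⟨hi1, hi2, hi3, hi4, by rw [hg _ _ ⟨hi1, hi2, hi3, hi4⟩, hD]⟩]
    have er : y + ((d : Int) + 1) * dy - dy = y + (d : Int) * dy := by ring
    have ec : x + ((d : Int) + 1) * dx - dx = x + (d : Int) * dx := by ring
    rw [er, ec]
    by_cases hG : ch (y + (d : Int) * dy) (x + (d : Int) * dx) = 'G'
    · rw [if_pos ⟨hl1, hl2, hl3, hl4, by rw [hgl, hG]⟩, if_pos hG]
    · by_cases hDot : ch (y + (d : Int) * dy) (x + (d : Int) * dx) = '.'
      · rw [if_neg (by rintro ⟨-, -, -, -, hcon⟩; rw [hgl] at hcon; exact hG (Option.some_inj.mp hcon))]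
        rw [if_pos ⟨hl1, hl2, hl3, hl4, by rw [hgl, hDot]⟩]
        rw [if_neg hG, if_pos hDot]
      · rw [if_neg (by rintro ⟨-, -, -, -, hcon⟩; rw [hgl] at hcon; exact hG (Option.some_inj.mp hcon))]
        rw [if_neg (by rintro ⟨-, -, -, -, hcon⟩; rw [hgl] at hcon; exact hDot (Option.some_inj.mp hcon))]
        rw [if_neg hG, if_neg hDot]

-- row y of the trimmed grid
def GtRow (Gt : List (List Char)) (y : Int) : List Char := PySem.List.pyGetD Gt y []

-- the character of the trimmed grid at (r, c)
def chGf (Gt : List (List Char)) (r c : Int) : Char := (pvGet2 Gt r c).getD ' '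

-- column x of the trimmed grid, exactly as B builds it
def colList (Gt : List (List Char)) (n x : Int) : List Char :=
  (PySem.List.pyRange 0 n 1).map fun yy => (pvGet2 Gt yy x).getD ' '

-- exact-shape hypothesis for the trimmed grid
def GtSh (n m : Int) (Gt : List (List Char)) : Prop :=
  ((Gt.length : Int) = n) ∧ ∀ row ∈ Gt, (row.length : Int) = m

lemma GtRow_length (n m : Int) (Gt : List (List Char)) (hsh : GtSh n m Gt)
    (y : Int) (hy : 0 ≤ y ∧ y < n) : ((GtRow Gt y).length : Int) = m := by
  obtain ⟨hlen, hrow⟩ := hsh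
  unfold GtRow
  rw [PySem.List.pyGetD_eq_getElem Gt _ hy.1 (by omega)]
  exact hrow _ (List.getElem_mem (by omega))

lemma pvGet2_row (n m : Int) (Gt : List (List Char)) (hsh : GtSh n m Gt)
    (y c : Int) (h : InB4 n m y c) :
    pvGet2 Gt y c = some ((GtRow Gt y).getD c.toNat ' ') := by
  obtain ⟨hy0, hyn, hc0, hcm⟩ := h
  obtain ⟨hlen, hrow⟩ := hsh
  have hrl : ((GtRow Gt y).length : Int) = m := GtRow_length n m Gt ⟨hlen, hrow⟩ y ⟨hy0, hyn⟩
  unfold pvGet2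
  rw [PySem.List.pyGet?_of_nonneg Gt hy0, List.getElem?_eq_getElem (by omega)]
  simp only [Option.bind_some]
  rw [PySem.List.pyGet?_of_nonneg _ hc0]
  unfold GtRow at hrl ⊢
  rw [PySem.List.pyGetD_eq_getElem Gt _ hy0 (by omega)] at hrl ⊢
  rw [List.getElem?_eq_getElem (by omega), List.getD_eq_getElem?_getD,
    List.getElem?_eq_getElem (by omega)]
  simp

lemma chGf_row (n m : Int) (Gt : List (List Char)) (hsh : GtSh n m Gt)
    (y c : Int) (h : InB4 n m y c) :
    chGf Gt y c = (GtRow Gt y).getD c.toNat ' ' := by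
  unfold chGf
  rw [pvGet2_row n m Gt hsh y c h]
  rfl

lemma colList_length (n : Int) (hn : 0 ≤ n) (Gt : List (List Char)) (x : Int) :
    ((colList Gt n x).length : Int) = n := by
  unfold colList
  rw [List.length_map, PySem.List.length_pyRange_one]
  omega

lemma colList_getD (n : Int) (Gt : List (List Char)) (x r : Int)
    (hr : 0 ≤ r ∧ r < n) :
    (colList Gt n x).getD r.toNat ' ' = chGf Gt r x := by
  unfold colList chGf
  rw [List.getD_eq_getElem?_getD, List.getElem?_map]
  rw [PySem.List.getElem?_pyRange_one 0 n r.toNat, if_pos (by omega)]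
  simp only [Option.map_some, Option.getD_some]
  have he : (0 : Int) + (r.toNat : Int) = r := by omega
  rw [he]

-- reversed-row access
lemma getD_reverse (row : List Char) (k : Nat) (hk : k < row.length) :
    row.reverse.getD k ' ' = row.getD (row.length - 1 - k) ' ' := by
  rw [List.getD_eq_getElem?_getD, List.getD_eq_getElem?_getD]
  rw [List.getElem?_reverse (by simpa using hk)]

-- B's table lookups
lemma idx2_map_sweep (n m : Int) (Gt : List (List Char)) (hsh : GtSh n m Gt)
    (y x : Int) (h : InB4 n m y x) :
    pvIdx2 (Gt.map fun row => pvSweep row 0) y x =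
      ((landLine (GtRow Gt y) x.toNat : Int)) := by
  obtain ⟨hy0, hyn, hx0, hxm⟩ := h
  obtain ⟨hlen, hrow⟩ := hsh
  have hrl : ((GtRow Gt y).length : Int) = m := GtRow_length n m Gt ⟨hlen, hrow⟩ y ⟨hy0, hyn⟩
  unfold pvIdx2
  rw [PySem.List.pyGetD_eq_getElem _ _ hy0 (by rw [List.length_map]; omega)]
  rw [List.getElem_map]
  have hGtRow : Gt[y.toNat] = GtRow Gt y := by
    unfold GtRow
    rw [PySem.List.pyGetD_eq_getElem Gt _ hy0 (by omega)]
  rw [hGtRow]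
  rw [PySem.List.pyGetD_eq_getElem _ _ hx0 (by rw [pvSweep_length]; omega)]
  have := pvSweep_getElem? (GtRow Gt y) 0 x.toNat (by omega)
  rw [List.getElem?_eq_getElem (by rw [pvSweep_length]; omega)] at this
  injection this with h'
  rw [h']
  omega

lemma idx2_map_sweep_rev (n m mm : Int) (Gt : List (List Char)) (hsh : GtSh n m Gt)
    (y x : Int) (h : InB4 n m y x) :
    pvIdx2 (Gt.map fun row => ((pvSweep row.reverse 0).reverse.map fun v => mm - 1 - v)) y x =
      mm - 1 - (landLine (GtRow Gt y).reverse (m.toNat - 1 - x.toNat) : Int) := by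
  obtain ⟨hy0, hyn, hx0, hxm⟩ := h
  obtain ⟨hlen, hrow⟩ := hsh
  have hrl : ((GtRow Gt y).length : Int) = m := GtRow_length n m Gt ⟨hlen, hrow⟩ y ⟨hy0, hyn⟩
  unfold pvIdx2
  rw [PySem.List.pyGetD_eq_getElem _ _ hy0 (by rw [List.length_map]; omega)]
  rw [List.getElem_map]
  have hGtRow : Gt[y.toNat] = GtRow Gt y := by
    unfold GtRow
    rw [PySem.List.pyGetD_eq_getElem Gt _ hy0 (by omega)]
  rw [hGtRow]
  have hlrev : ((pvSweep (GtRow Gt y).reverse 0).reverse.map fun v => mm - 1 - v).length =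
      (GtRow Gt y).length := by
    rw [List.length_map, List.length_reverse, pvSweep_length, List.length_reverse]
  rw [PySem.List.pyGetD_eq_getElem _ _ hx0 (by rw [hlrev]; omega)]
  rw [List.getElem_map, List.getElem_reverse]
  have hsl : (pvSweep (GtRow Gt y).reverse 0).length = (GtRow Gt y).length := by
    rw [pvSweep_length, List.length_reverse]
  have hidx : (pvSweep (GtRow Gt y).reverse 0).length - 1 - x.toNat =
      m.toNat - 1 - x.toNat := by omega
  simp only [hidx]
  have := pvSweep_getElem? (GtRow Gt y).reverse 0 (m.toNat - 1 - x.toNat)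
    (by rw [List.length_reverse]; omega)
  rw [List.getElem?_eq_getElem (by rw [hsl]; omega)] at this
  injection this with h'
  rw [h']
  omega

lemma idx2_cols_sweep (n m : Int) (Gt : List (List Char)) (hn : 0 ≤ n)
    (x y : Int) (hx : 0 ≤ x ∧ x < m) (hy : 0 ≤ y ∧ y < n) :
    pvIdx2 (((PySem.List.pyRange 0 m 1).map fun x => colList Gt n x).map
        fun col => pvSweep col 0) x y =
      ((landLine (colList Gt n x) y.toNat : Int)) := by
  have hcl : ((colList Gt n x).length : Int) = n := colList_length n hn Gt x
  unfold pvIdx2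
  rw [PySem.List.pyGetD_eq_getElem _ _ hx.1
    (by rw [List.length_map, List.length_map, PySem.List.length_pyRange_one]; omega)]
  rw [List.getElem_map, List.getElem_map]
  rw [PySem.List.getElem_pyRange_one 0 m x.toNat _]
  have he : (0 : Int) + (x.toNat : Int) = x := by omega
  rw [he]
  rw [PySem.List.pyGetD_eq_getElem _ _ hy.1 (by rw [pvSweep_length]; omega)]
  have := pvSweep_getElem? (colList Gt n x) 0 y.toNat (by omega)
  rw [List.getElem?_eq_getElem (by rw [pvSweep_length]; omega)] at this
  injection this with h'
  rw [h']
  omega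

lemma idx2_cols_sweep_rev (n m nn : Int) (Gt : List (List Char)) (hn : 0 ≤ n)
    (x y : Int) (hx : 0 ≤ x ∧ x < m) (hy : 0 ≤ y ∧ y < n) :
    pvIdx2 (((PySem.List.pyRange 0 m 1).map fun x => colList Gt n x).map
        fun col => ((pvSweep col.reverse 0).reverse.map fun v => nn - 1 - v)) x y =
      nn - 1 - ((landLine (colList Gt n x).reverse (n.toNat - 1 - y.toNat) : Int)) := by
  have hcl : ((colList Gt n x).length : Int) = n := colList_length n hn Gt x
  unfold pvIdx2
  rw [PySem.List.pyGetD_eq_getElem _ _ hx.1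
    (by rw [List.length_map, List.length_map, PySem.List.length_pyRange_one]; omega)]
  rw [List.getElem_map, List.getElem_map]
  rw [PySem.List.getElem_pyRange_one 0 m x.toNat _]
  have he : (0 : Int) + (x.toNat : Int) = x := by omega
  rw [he]
  have hsl : (pvSweep (colList Gt n x).reverse 0).length = (colList Gt n x).length := by
    rw [pvSweep_length, List.length_reverse]
  rw [PySem.List.pyGetD_eq_getElem _ _ hy.1
    (by rw [List.length_map, List.length_reverse, hsl]; omega)]
  rw [List.getElem_map, List.getElem_reverse]
  have hidx : (pvSweep (colList Gt n x).reverse 0).length - 1 - y.toNat =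
      n.toNat - 1 - y.toNat := by omega
  simp only [hidx]
  have := pvSweep_getElem? (colList Gt n x).reverse 0 (n.toNat - 1 - y.toNat)
    (by rw [List.length_reverse]; omega)
  rw [List.getElem?_eq_getElem (by rw [hsl]; omega)] at this
  injection this with h'
  rw [h']
  omega

-- RIGHT (dy = 0, dx = 1)
lemma right_spec (n m : Int) (Gt : List (List Char)) (hsh : GtSh n m Gt)
    (y x : Int) (hb : InB4 n m y x) :
    ∃ d : Nat,
      x + (d : Int) = pvIdx2 (Gt.map fun row => pvSweep row 0) y x ∧
      (∀ t : Nat, 1 ≤ t → t ≤ d →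
        InB4 n m y (x + (t : Int)) ∧ chGf Gt y (x + (t : Int)) ≠ 'D') ∧
      (¬ InB4 n m y (x + ((d : Int) + 1)) ∨
        (InB4 n m y (x + ((d : Int) + 1)) ∧ chGf Gt y (x + ((d : Int) + 1)) = 'D')) := by
  obtain ⟨hy0, hyn, hx0, hxm⟩ := hb
  have hrl : ((GtRow Gt y).length : Int) = m := GtRow_length n m Gt hsh y ⟨hy0, hyn⟩
  have hLge := landLine_ge (GtRow Gt y) x.toNat
  have hLlt := landLine_lt (GtRow Gt y) x.toNat (by omega)
  refine ⟨landLine (GtRow Gt y) x.toNat - x.toNat, ?_, ?_, ?_⟩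
  · rw [idx2_map_sweep n m Gt hsh y x ⟨hy0, hyn, hx0, hxm⟩]
    omega
  · intro t ht1 ht2
    have hbt : InB4 n m y (x + (t : Int)) := ⟨hy0, hyn, by omega, by omega⟩
    refine ⟨hbt, ?_⟩
    rw [chGf_row n m Gt hsh y _ hbt]
    have : (x + (t : Int)).toNat = x.toNat + t := by omega
    rw [this]
    exact landLine_path (GtRow Gt y) x.toNat (x.toNat + t) (by omega) (by omega)
  · rcases landLine_stop (GtRow Gt y) x.toNat with hge | hD
    · left; rintro ⟨-, -, -, hcon⟩; omega
    · have hlt : landLine (GtRow Gt y) x.toNat + 1 < (GtRow Gt y).length := by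
        by_contra hcon
        rw [List.getD_eq_default _ _ (by omega)] at hD
        exact absurd hD (by decide)
      right
      have hbt : InB4 n m y
          (x + (((landLine (GtRow Gt y) x.toNat - x.toNat : Nat) : Int) + 1)) :=
        ⟨hy0, hyn, by omega, by omega⟩
      refine ⟨hbt, ?_⟩
      rw [chGf_row n m Gt hsh y _ hbt]
      have htn : (x + (((landLine (GtRow Gt y) x.toNat - x.toNat : Nat) : Int) + 1)).toNat =
          landLine (GtRow Gt y) x.toNat + 1 := by omega
      rw [htn]
      exact hD

-- LEFT (dy = 0, dx = -1)
lemma left_spec (n m : Int) (Gt : List (List Char)) (hsh : GtSh n m Gt)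
    (y x : Int) (hb : InB4 n m y x) :
    ∃ d : Nat,
      x - (d : Int) =
        pvIdx2 (Gt.map fun row => ((pvSweep row.reverse 0).reverse.map fun v => m - 1 - v)) y x ∧
      (∀ t : Nat, 1 ≤ t → t ≤ d →
        InB4 n m y (x - (t : Int)) ∧ chGf Gt y (x - (t : Int)) ≠ 'D') ∧
      (¬ InB4 n m y (x - ((d : Int) + 1)) ∨
        (InB4 n m y (x - ((d : Int) + 1)) ∧ chGf Gt y (x - ((d : Int) + 1)) = 'D')) := by
  obtain ⟨hy0, hyn, hx0, hxm⟩ := hb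
  have hrl : ((GtRow Gt y).length : Int) = m := GtRow_length n m Gt hsh y ⟨hy0, hyn⟩
  have hrevl : (GtRow Gt y).reverse.length = (GtRow Gt y).length := List.length_reverse
  have hLge := landLine_ge (GtRow Gt y).reverse ((GtRow Gt y).length - 1 - x.toNat)
  have hLlt := landLine_lt (GtRow Gt y).reverse ((GtRow Gt y).length - 1 - x.toNat) (by omega)
  set Lr := landLine (GtRow Gt y).reverse ((GtRow Gt y).length - 1 - x.toNat) with hLr
  refine ⟨x.toNat - ((GtRow Gt y).length - 1 - Lr), ?_, ?_, ?_⟩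
  · rw [idx2_map_sweep_rev n m m Gt hsh y x ⟨hy0, hyn, hx0, hxm⟩]
    have : m.toNat - 1 - x.toNat = (GtRow Gt y).length - 1 - x.toNat := by omega
    rw [this, ← hLr]
    omega
  · intro t ht1 ht2
    have hbt : InB4 n m y (x - (t : Int)) := ⟨hy0, hyn, by omega, by omega⟩
    refine ⟨hbt, ?_⟩
    rw [chGf_row n m Gt hsh y _ hbt]
    have hpP := landLine_path (GtRow Gt y).reverse ((GtRow Gt y).length - 1 - x.toNat)
      ((GtRow Gt y).length - 1 - x.toNat + t) (by omega) (by omega)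
    rw [getD_reverse _ _ (by omega)] at hpP
    have : (x - (t : Int)).toNat = (GtRow Gt y).length - 1 -
        ((GtRow Gt y).length - 1 - x.toNat + t) := by omega
    rw [this]
    exact hpP
  · rcases landLine_stop (GtRow Gt y).reverse ((GtRow Gt y).length - 1 - x.toNat) with hge | hD
    · left; rintro ⟨-, -, hcon, -⟩; omega
    · have hlt : Lr + 1 < (GtRow Gt y).length := by
        by_contra hcon
        rw [List.getD_eq_default _ _ (by omega)] at hD
        exact absurd hD (by decide)
      right
      rw [getD_reverse _ _ (by omega)] at hD
      have hbt : InB4 n m y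
          (x - (((x.toNat - ((GtRow Gt y).length - 1 - Lr) : Nat) : Int) + 1)) :=
        ⟨hy0, hyn, by omega, by omega⟩
      refine ⟨hbt, ?_⟩
      rw [chGf_row n m Gt hsh y _ hbt]
      have htn : (x - (((x.toNat - ((GtRow Gt y).length - 1 - Lr) : Nat) : Int) + 1)).toNat =
          (GtRow Gt y).length - 1 - (Lr + 1) := by omega
      rw [htn]
      exact hD

-- DOWN (dy = 1, dx = 0)
lemma down_spec (n m : Int) (Gt : List (List Char)) (hsh : GtSh n m Gt)
    (y x : Int) (hb : InB4 n m y x) :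
    ∃ d : Nat,
      y + (d : Int) =
        pvIdx2 (((PySem.List.pyRange 0 m 1).map fun x => colList Gt n x).map
          fun col => pvSweep col 0) x y ∧
      (∀ t : Nat, 1 ≤ t → t ≤ d →
        InB4 n m (y + (t : Int)) x ∧ chGf Gt (y + (t : Int)) x ≠ 'D') ∧
      (¬ InB4 n m (y + ((d : Int) + 1)) x ∨
        (InB4 n m (y + ((d : Int) + 1)) x ∧ chGf Gt (y + ((d : Int) + 1)) x = 'D')) := by
  obtain ⟨hy0, hyn, hx0, hxm⟩ := hb
  have hcl : ((colList Gt n x).length : Int) = n := colList_length n (by omega) Gt x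
  have hLge := landLine_ge (colList Gt n x) y.toNat
  have hLlt := landLine_lt (colList Gt n x) y.toNat (by omega)
  refine ⟨landLine (colList Gt n x) y.toNat - y.toNat, ?_, ?_, ?_⟩
  · rw [idx2_cols_sweep n m Gt (by omega) x y ⟨hx0, hxm⟩ ⟨hy0, hyn⟩]
    omega
  · intro t ht1 ht2
    have hbt : InB4 n m (y + (t : Int)) x := ⟨by omega, by omega, hx0, hxm⟩
    refine ⟨hbt, ?_⟩
    have hcg := colList_getD n Gt x (y + (t : Int)) (by omega)
    rw [← hcg]
    have : (y + (t : Int)).toNat = y.toNat + t := by omega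
    rw [this]
    exact landLine_path (colList Gt n x) y.toNat (y.toNat + t) (by omega) (by omega)
  · rcases landLine_stop (colList Gt n x) y.toNat with hge | hD
    · left; rintro ⟨-, hcon, -, -⟩; omega
    · have hlt : landLine (colList Gt n x) y.toNat + 1 < (colList Gt n x).length := by
        by_contra hcon
        rw [List.getD_eq_default _ _ (by omega)] at hD
        exact absurd hD (by decide)
      right
      have hbt : InB4 n m
          (y + (((landLine (colList Gt n x) y.toNat - y.toNat : Nat) : Int) + 1)) x :=
        ⟨by omega, by omega, hx0, hxm⟩
      refine ⟨hbt, ?_⟩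
      have hcg := colList_getD n Gt x
        (y + (((landLine (colList Gt n x) y.toNat - y.toNat : Nat) : Int) + 1)) (by omega)
      rw [← hcg]
      have htn : (y + (((landLine (colList Gt n x) y.toNat - y.toNat : Nat) : Int) + 1)).toNat =
          landLine (colList Gt n x) y.toNat + 1 := by omega
      rw [htn]
      exact hD

-- UP (dy = -1, dx = 0)
lemma up_spec (n m : Int) (Gt : List (List Char)) (hsh : GtSh n m Gt)
    (y x : Int) (hb : InB4 n m y x) :
    ∃ d : Nat,
      y - (d : Int) =
        pvIdx2 (((PySem.List.pyRange 0 m 1).map fun x => colList Gt n x).map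
          fun col => ((pvSweep col.reverse 0).reverse.map fun v => n - 1 - v)) x y ∧
      (∀ t : Nat, 1 ≤ t → t ≤ d →
        InB4 n m (y - (t : Int)) x ∧ chGf Gt (y - (t : Int)) x ≠ 'D') ∧
      (¬ InB4 n m (y - ((d : Int) + 1)) x ∨
        (InB4 n m (y - ((d : Int) + 1)) x ∧ chGf Gt (y - ((d : Int) + 1)) x = 'D')) := by
  obtain ⟨hy0, hyn, hx0, hxm⟩ := hb
  have hcl : ((colList Gt n x).length : Int) = n := colList_length n (by omega) Gt x
  have hrevl : (colList Gt n x).reverse.length = (colList Gt n x).length := List.length_reverse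
  have hLge := landLine_ge (colList Gt n x).reverse ((colList Gt n x).length - 1 - y.toNat)
  have hLlt := landLine_lt (colList Gt n x).reverse ((colList Gt n x).length - 1 - y.toNat)
    (by omega)
  set Lr := landLine (colList Gt n x).reverse ((colList Gt n x).length - 1 - y.toNat) with hLr
  refine ⟨y.toNat - ((colList Gt n x).length - 1 - Lr), ?_, ?_, ?_⟩
  · rw [idx2_cols_sweep_rev n m n Gt (by omega) x y ⟨hx0, hxm⟩ ⟨hy0, hyn⟩]
    have : n.toNat - 1 - y.toNat = (colList Gt n x).length - 1 - y.toNat := by omega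
    rw [this, ← hLr]
    omega
  · intro t ht1 ht2
    have hbt : InB4 n m (y - (t : Int)) x := ⟨by omega, by omega, hx0, hxm⟩
    refine ⟨hbt, ?_⟩
    have hcg := colList_getD n Gt x (y - (t : Int)) (by omega)
    rw [← hcg]
    have hpP := landLine_path (colList Gt n x).reverse ((colList Gt n x).length - 1 - y.toNat)
      ((colList Gt n x).length - 1 - y.toNat + t) (by omega) (by omega)
    rw [getD_reverse _ _ (by omega)] at hpP
    have : (y - (t : Int)).toNat = (colList Gt n x).length - 1 -
        ((colList Gt n x).length - 1 - y.toNat + t) := by omega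
    rw [this]
    exact hpP
  · rcases landLine_stop (colList Gt n x).reverse ((colList Gt n x).length - 1 - y.toNat)
      with hge | hD
    · left; rintro ⟨hcon, -, -, -⟩; omega
    · have hlt : Lr + 1 < (colList Gt n x).length := by
        by_contra hcon
        rw [List.getD_eq_default _ _ (by omega)] at hD
        exact absurd hD (by decide)
      right
      rw [getD_reverse _ _ (by omega)] at hD
      have hbt : InB4 n m
          (y - (((y.toNat - ((colList Gt n x).length - 1 - Lr) : Nat) : Int) + 1)) x :=
        ⟨by omega, by omega, hx0, hxm⟩
      refine ⟨hbt, ?_⟩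
      have hcg := colList_getD n Gt x
        (y - (((y.toNat - ((colList Gt n x).length - 1 - Lr) : Nat) : Int) + 1)) (by omega)
      rw [← hcg]
      have htn : (y - (((y.toNat - ((colList Gt n x).length - 1 - Lr) : Nat) : Int) + 1)).toNat =
          (colList Gt n x).length - 1 - (Lr + 1) := by omega
      rw [htn]
      exact hD

-- character seen by A's mutated board, expressed over the original grid and visited set
def chW (Gt : List (List Char)) (vis : List (Int × Int)) (p : Int × Int) : Char :=
  if p ∈ vis then 'V' else chGf Gt p.1 p.2

-- invariant: A's board equals the original with the visited cells overwritten by 'V'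
def GInvP (n m : Int) (Gt g : List (List Char)) (vis : List (Int × Int)) : Prop :=
  ∀ r c : Int, InB4 n m r c →
    pvGet2 g r c = if (r, c) ∈ vis then some 'V' else pvGet2 Gt r c

-- invariant: visited cells are in bounds and were '.' or 'R' originally
def VisOkP (n m : Int) (Gt : List (List Char)) (vis : List (Int × Int)) : Prop :=
  ∀ p ∈ vis, InB4 n m p.1 p.2 ∧
    (pvGet2 Gt p.1 p.2 = some '.' ∨ pvGet2 Gt p.1 p.2 = some 'R')

-- invariant: queued nodes are visited and in bounds
def QOk (n m : Int) (vis : List (Int × Int)) (q : List (Int × Int × Int)) : Prop :=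
  ∀ e ∈ q, (e.1, e.2.1) ∈ vis ∧ InB4 n m e.1 e.2.1

lemma pvGet2_chGf (n m : Int) (Gt : List (List Char)) (hGt : GtSh n m Gt)
    (r c : Int) (h : InB4 n m r c) : pvGet2 Gt r c = some (chGf Gt r c) := by
  obtain ⟨ch, hch⟩ := pvGet2_eq_some n m Gt ⟨hGt.1, fun row hr => le_of_eq (hGt.2 row hr).symm⟩ r c h
  unfold chGf; rw [hch]; rfl

lemma hg_of_inv (n m : Int) (Gt g : List (List Char)) (vis : List (Int × Int))
    (hGt : GtSh n m Gt) (hinv : GInvP n m Gt g vis) :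
    ∀ r c : Int, InB4 n m r c → pvGet2 g r c = some (chW Gt vis (r, c)) := by
  intro r c h
  rw [hinv r c h]
  unfold chW
  by_cases hm : (r, c) ∈ vis
  · rw [if_pos hm, if_pos hm]
  · rw [if_neg hm, if_neg hm]
    exact pvGet2_chGf n m Gt hGt r c h

-- preservation of the invariants when a '.' cell is enqueued and marked
lemma inv_mark (n m : Int) (Gt g : List (List Char)) (vis : List (Int × Int))
    (hGt : GtSh n m Gt) (hsh : GSh n m g) (hinv : GInvP n m Gt g vis)
    (hvok : VisOkP n m Gt vis) (l : Int × Int) (hl : InB4 n m l.1 l.2)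
    (hnot : l ∉ vis) (hdot : chGf Gt l.1 l.2 = '.') :
    GSh n m (pvSet2 g l.1 l.2 'V') ∧
    GInvP n m Gt (pvSet2 g l.1 l.2 'V') (vis ++ [l]) ∧
    VisOkP n m Gt (vis ++ [l]) := by
  refine ⟨pvSet2_gsh n m g hsh l.1 l.2 hl 'V', ?_, ?_⟩
  · intro r c h
    rw [pvSet2_get2 n m g hsh l.1 l.2 hl 'V' r c h]
    by_cases he : r = l.1 ∧ c = l.2
    · rw [if_pos he, if_pos (by
        simp only [List.mem_append, List.mem_singleton]
        right
        rw [Prod.ext_iff]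
        exact ⟨he.1, he.2⟩)]
    · rw [if_neg he, hinv r c h]
      by_cases hm : (r, c) ∈ vis
      · rw [if_pos hm, if_pos (by simp [List.mem_append, hm])]
      · rw [if_neg hm, if_neg (by
          simp only [List.mem_append, List.mem_singleton]
          rintro (hc | hc)
          · exact hm hc
          · exact he ⟨congrArg Prod.fst hc, congrArg Prod.snd hc⟩)]
  · intro p hp
    rcases List.mem_append.mp hp with hp | hp
    · exact hvok p hp
    · rw [List.mem_singleton] at hp
      subst hp
      exact ⟨hl, Or.inl (by rw [pvGet2_chGf n m Gt hGt _ _ hl, hdot])⟩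

-- outcome of one direction of A's scan, phrased against B's table landing
def StepOk (n m y x cnt : Int) (Gt : List (List Char)) (dyx l : Int × Int) : Prop :=
  ∀ (g : List (List Char)) (vis : List (Int × Int)) (q : List (Int × Int × Int)),
    GSh n m g → GInvP n m Gt g vis → VisOkP n m Gt vis → (y, x) ∈ vis →
    pvAWalk n m y x cnt dyx.1 dyx.2 (PySem.List.pyRange 1 (max n m) 1) g q =
      (if chW Gt vis l = 'G' then (some (cnt + 1), g, q)
       else if chW Gt vis l = '.' then
         (none, pvSet2 g l.1 l.2 'V', q ++ [(l.1, l.2, cnt + 1)])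
       else (none, g, q))

lemma chW_ne_D (Gt : List (List Char)) (vis : List (Int × Int)) (p : Int × Int)
    (h : chGf Gt p.1 p.2 ≠ 'D') : chW Gt vis p ≠ 'D' := by
  unfold chW
  by_cases hm : p ∈ vis
  · rw [if_pos hm]; decide
  · rw [if_neg hm]; exact h

lemma chW_eq_D (n m : Int) (Gt : List (List Char)) (hGt : GtSh n m Gt)
    (vis : List (Int × Int)) (hvok : VisOkP n m Gt vis) (p : Int × Int)
    (hb : InB4 n m p.1 p.2) (h : chGf Gt p.1 p.2 = 'D') : chW Gt vis p = 'D' := by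
  unfold chW
  by_cases hm : p ∈ vis
  · exfalso
    have hg := pvGet2_chGf n m Gt hGt p.1 p.2 hb
    rcases (hvok p hm).2 with hc | hc <;> rw [hg, h] at hc <;> exact absurd hc (by decide)
  · rw [if_neg hm]; exact h

lemma step_right (n m y x cnt : Int) (Gt : List (List Char)) (hGt : GtSh n m Gt)
    (hb : InB4 n m y x) :
    StepOk n m y x cnt Gt (0, 1) (y, pvIdx2 (Gt.map fun row => pvSweep row 0) y x) ∧
    InB4 n m y (pvIdx2 (Gt.map fun row => pvSweep row 0) y x) := by
  obtain ⟨d, htab, hpath, hstop⟩ := right_spec n m Gt hGt y x hb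
  have hbl : InB4 n m y (pvIdx2 (Gt.map fun row => pvSweep row 0) y x) := by
    rw [← htab]
    rcases Nat.eq_zero_or_pos d with hd0 | hd1
    · subst hd0; simpa using hb
    · exact (hpath d hd1 le_rfl).1
  refine ⟨?_, hbl⟩
  intro g vis q hsh hinv hvok hyx
  have hm := pvAWalk_master n m y x cnt 0 1 g q (fun r c => chW Gt vis (r, c))
    (fun r c h => hg_of_inv n m Gt g vis hGt hinv r c h)
    (Or.inl ⟨rfl, Or.inl rfl⟩) hb d
    (by
      intro t ht1 ht2
      have := hpath t ht1 ht2
      simp only [mul_zero, add_zero, mul_one]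
      exact ⟨this.1, chW_ne_D Gt vis _ this.2⟩)
    (by
      simp only [mul_zero, add_zero, mul_one]
      rcases hstop with hout | ⟨hin, hD⟩
      · exact Or.inl hout
      · exact Or.inr ⟨hin, chW_eq_D n m Gt hGt vis hvok _ hin hD⟩)
    (by simp only [chW, if_pos hyx])
  simp only [mul_zero, add_zero, mul_one] at hm
  rw [htab] at hm
  exact hm

lemma step_left (n m y x cnt : Int) (Gt : List (List Char)) (hGt : GtSh n m Gt)
    (hb : InB4 n m y x) :
    StepOk n m y x cnt Gt (0, -1)
      (y, pvIdx2 (Gt.map fun row =>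
        ((pvSweep row.reverse 0).reverse.map fun v => m - 1 - v)) y x) ∧
    InB4 n m y (pvIdx2 (Gt.map fun row =>
        ((pvSweep row.reverse 0).reverse.map fun v => m - 1 - v)) y x) := by
  obtain ⟨d, htab, hpath, hstop⟩ := left_spec n m Gt hGt y x hb
  have hbl : InB4 n m y (pvIdx2 (Gt.map fun row =>
      ((pvSweep row.reverse 0).reverse.map fun v => m - 1 - v)) y x) := by
    rw [← htab]
    rcases Nat.eq_zero_or_pos d with hd0 | hd1
    · subst hd0; simpa using hb
    · exact (hpath d hd1 le_rfl).1
  refine ⟨?_, hbl⟩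
  intro g vis q hsh hinv hvok hyx
  have hm := pvAWalk_master n m y x cnt 0 (-1) g q (fun r c => chW Gt vis (r, c))
    (fun r c h => hg_of_inv n m Gt g vis hGt hinv r c h)
    (Or.inl ⟨rfl, Or.inr rfl⟩) hb d
    (by
      intro t ht1 ht2
      have := hpath t ht1 ht2
      simp only [mul_zero, add_zero, mul_neg_one, ← sub_eq_add_neg]
      exact ⟨this.1, chW_ne_D Gt vis _ this.2⟩)
    (by
      simp only [mul_zero, add_zero, mul_neg_one, ← sub_eq_add_neg]
      rcases hstop with hout | ⟨hin, hD⟩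
      · exact Or.inl hout
      · exact Or.inr ⟨hin, chW_eq_D n m Gt hGt vis hvok _ hin hD⟩)
    (by simp only [chW, if_pos hyx])
  simp only [mul_zero, add_zero, mul_neg_one, ← sub_eq_add_neg] at hm
  rw [htab] at hm
  exact hm

lemma step_down (n m y x cnt : Int) (Gt : List (List Char)) (hGt : GtSh n m Gt)
    (hb : InB4 n m y x) :
    StepOk n m y x cnt Gt (1, 0)
      (pvIdx2 (((PySem.List.pyRange 0 m 1).map fun x => colList Gt n x).map
        fun col => pvSweep col 0) x y, x) ∧
    InB4 n m (pvIdx2 (((PySem.List.pyRange 0 m 1).map fun x => colList Gt n x).map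
        fun col => pvSweep col 0) x y) x := by
  obtain ⟨d, htab, hpath, hstop⟩ := down_spec n m Gt hGt y x hb
  have hbl : InB4 n m (pvIdx2 (((PySem.List.pyRange 0 m 1).map fun x => colList Gt n x).map
      fun col => pvSweep col 0) x y) x := by
    rw [← htab]
    rcases Nat.eq_zero_or_pos d with hd0 | hd1
    · subst hd0; simpa using hb
    · exact (hpath d hd1 le_rfl).1
  refine ⟨?_, hbl⟩
  intro g vis q hsh hinv hvok hyx
  have hm := pvAWalk_master n m y x cnt 1 0 g q (fun r c => chW Gt vis (r, c))
    (fun r c h => hg_of_inv n m Gt g vis hGt hinv r c h)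
    (Or.inr ⟨rfl, Or.inl rfl⟩) hb d
    (by
      intro t ht1 ht2
      have := hpath t ht1 ht2
      simp only [mul_zero, add_zero, mul_one]
      exact ⟨this.1, chW_ne_D Gt vis _ this.2⟩)
    (by
      simp only [mul_zero, add_zero, mul_one]
      rcases hstop with hout | ⟨hin, hD⟩
      · exact Or.inl hout
      · exact Or.inr ⟨hin, chW_eq_D n m Gt hGt vis hvok _ hin hD⟩)
    (by simp only [chW, if_pos hyx])
  simp only [mul_zero, add_zero, mul_one] at hm
  rw [htab] at hm
  exact hm

lemma step_up (n m y x cnt : Int) (Gt : List (List Char)) (hGt : GtSh n m Gt)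
    (hb : InB4 n m y x) :
    StepOk n m y x cnt Gt (-1, 0)
      (pvIdx2 (((PySem.List.pyRange 0 m 1).map fun x => colList Gt n x).map
        fun col => ((pvSweep col.reverse 0).reverse.map fun v => n - 1 - v)) x y, x) ∧
    InB4 n m (pvIdx2 (((PySem.List.pyRange 0 m 1).map fun x => colList Gt n x).map
        fun col => ((pvSweep col.reverse 0).reverse.map fun v => n - 1 - v)) x y) x := by
  obtain ⟨d, htab, hpath, hstop⟩ := up_spec n m Gt hGt y x hb
  have hbl : InB4 n m (pvIdx2 (((PySem.List.pyRange 0 m 1).map fun x => colList Gt n x).map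
      fun col => ((pvSweep col.reverse 0).reverse.map fun v => n - 1 - v)) x y) x := by
    rw [← htab]
    rcases Nat.eq_zero_or_pos d with hd0 | hd1
    · subst hd0; simpa using hb
    · exact (hpath d hd1 le_rfl).1
  refine ⟨?_, hbl⟩
  intro g vis q hsh hinv hvok hyx
  have hm := pvAWalk_master n m y x cnt (-1) 0 g q (fun r c => chW Gt vis (r, c))
    (fun r c h => hg_of_inv n m Gt g vis hGt hinv r c h)
    (Or.inr ⟨rfl, Or.inr rfl⟩) hb d
    (by
      intro t ht1 ht2
      have := hpath t ht1 ht2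
      simp only [mul_zero, add_zero, mul_neg_one, ← sub_eq_add_neg]
      exact ⟨this.1, chW_ne_D Gt vis _ this.2⟩)
    (by
      simp only [mul_zero, add_zero, mul_neg_one, ← sub_eq_add_neg]
      rcases hstop with hout | ⟨hin, hD⟩
      · exact Or.inl hout
      · exact Or.inr ⟨hin, chW_eq_D n m Gt hGt vis hvok _ hin hD⟩)
    (by simp only [chW, if_pos hyx])
  simp only [mul_zero, add_zero, mul_neg_one, ← sub_eq_add_neg] at hm
  rw [htab] at hm
  exact hm

lemma expand_chain (n m y x cnt : Int) (Gt : List (List Char)) (hGt : GtSh n m Gt) :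
    ∀ (pairs : List ((Int × Int) × (Int × Int))) (g : List (List Char))
      (vis : List (Int × Int)) (q : List (Int × Int × Int)),
    GSh n m g → GInvP n m Gt g vis → VisOkP n m Gt vis → QOk n m vis q → (y, x) ∈ vis →
    (∀ pr ∈ pairs, StepOk n m y x cnt Gt pr.1 pr.2 ∧ InB4 n m pr.2.1 pr.2.2) →
    (pvADirs n m y x cnt (pairs.map Prod.fst) g q).1 =
      (pvBExpand Gt cnt (pairs.map Prod.snd) q vis).1 ∧
    ((pvADirs n m y x cnt (pairs.map Prod.fst) g q).1 = none →
      (pvADirs n m y x cnt (pairs.map Prod.fst) g q).2.2 =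
        (pvBExpand Gt cnt (pairs.map Prod.snd) q vis).2.1 ∧
      GSh n m (pvADirs n m y x cnt (pairs.map Prod.fst) g q).2.1 ∧
      GInvP n m Gt (pvADirs n m y x cnt (pairs.map Prod.fst) g q).2.1
        (pvBExpand Gt cnt (pairs.map Prod.snd) q vis).2.2 ∧
      VisOkP n m Gt (pvBExpand Gt cnt (pairs.map Prod.snd) q vis).2.2 ∧
      QOk n m (pvBExpand Gt cnt (pairs.map Prod.snd) q vis).2.2
        (pvADirs n m y x cnt (pairs.map Prod.fst) g q).2.2 ∧
      (y, x) ∈ (pvBExpand Gt cnt (pairs.map Prod.snd) q vis).2.2 ∧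
      vis ⊆ (pvBExpand Gt cnt (pairs.map Prod.snd) q vis).2.2) := by
  intro pairs
  induction pairs with
  | nil =>
    intro g vis q hsh hinv hvok hqok hyx _
    exact ⟨rfl, fun _ => ⟨rfl, hsh, hinv, hvok, hqok, hyx, fun a ha => ha⟩⟩
  | cons pr rest ih =>
    intro g vis q hsh hinv hvok hqok hyx hpairs
    obtain ⟨⟨dy, dx⟩, ny, nx⟩ := pr
    obtain ⟨hstep, hbl⟩ := hpairs _ (List.mem_cons_self)
    have hrest := fun pr hpr => hpairs pr (List.mem_cons_of_mem _ hpr)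
    have hw := hstep g vis q hsh hinv hvok hyx
    simp only [List.map_cons, pvADirs, pvBExpand, hw]
    have hGtl := pvGet2_chGf n m Gt hGt ny nx hbl
    by_cases hG : chW Gt vis (ny, nx) = 'G'
    · have hnv : (ny, nx) ∉ vis := by
        intro hcon; unfold chW at hG; rw [if_pos hcon] at hG; exact absurd hG (by decide)
      have hch : chGf Gt ny nx = 'G' := by unfold chW at hG; rwa [if_neg hnv] at hG
      rw [if_pos hG, if_pos (by rw [hGtl, hch])]
      exact ⟨rfl, by intro hcon; exact absurd hcon (by simp)⟩
    · by_cases hDot : chW Gt vis (ny, nx) = '.'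
      · have hnv : (ny, nx) ∉ vis := by
          intro hcon; unfold chW at hDot; rw [if_pos hcon] at hDot; exact absurd hDot (by decide)
        have hch : chGf Gt ny nx = '.' := by unfold chW at hDot; rwa [if_neg hnv] at hDot
        rw [if_neg hG, if_pos hDot]
        have hcont : PySem.Set.contains vis (ny, nx) = false := by
          by_contra hcon
          exact hnv ((PySem.Set.contains_iff vis (ny, nx)).mp (by simpa using hcon))
        rw [if_neg (by rw [hGtl, hch]; decide),
          if_pos ⟨by rw [hGtl, hch], by rw [hcont]; simp⟩]
        have hadd : PySem.Set.add vis (ny, nx) = vis ++ [(ny, nx)] := by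
          unfold PySem.Set.add
          rw [hcont]
          simp
        rw [hadd]
        obtain ⟨hsh', hinv', hvok'⟩ :=
          inv_mark n m Gt g vis hGt hsh hinv hvok (ny, nx) hbl hnv hch
        have hind := ih (pvSet2 g ny nx 'V') (vis ++ [(ny, nx)]) (q ++ [(ny, nx, cnt + 1)])
          hsh' hinv' hvok'
          (by
            intro e he
            rcases List.mem_append.mp he with he | he
            · obtain ⟨h1, h2⟩ := hqok e he
              exact ⟨List.mem_append.mpr (Or.inl h1), h2⟩
            · rw [List.mem_singleton] at he
              subst he
              exact ⟨List.mem_append.mpr (Or.inr (by simp)), hbl⟩)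
          (List.mem_append.mpr (Or.inl hyx)) hrest
        refine ⟨hind.1, fun hnone => ?_⟩
        obtain ⟨a1, a2, a3, a4, a5, a6, a7⟩ := hind.2 hnone
        exact ⟨a1, a2, a3, a4, a5, a6,
          fun p hp => a7 (List.mem_append.mpr (Or.inl hp))⟩
      · rw [if_neg hG, if_neg hDot]
        have hskip : ¬ (pvGet2 Gt ny nx = some 'G') ∧
            ¬ (pvGet2 Gt ny nx = some '.' ∧ ¬ PySem.Set.contains vis (ny, nx)) := by
          by_cases hnv : (ny, nx) ∈ vis
          · have hcont : PySem.Set.contains vis (ny, nx) = true :=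
              (PySem.Set.contains_iff vis (ny, nx)).mpr hnv
            rcases (hvok _ hnv).2 with hc | hc <;>
              exact ⟨by rw [hc]; decide, by rintro ⟨-, hcon⟩; exact hcon hcont⟩
          · have hch : chW Gt vis (ny, nx) = chGf Gt ny nx := by
              unfold chW; rw [if_neg hnv]
            rw [hch] at hG hDot
            constructor
            · rw [hGtl]; intro hcon; exact hG (Option.some_inj.mp hcon)
            · rintro ⟨hcon, -⟩; rw [hGtl] at hcon; exact hDot (Option.some_inj.mp hcon)
        rw [if_neg hskip.1, if_neg hskip.2]
        exact ih g vis q hsh hinv hvok hqok hyx hrest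

lemma bfs_lockstep (n m : Int) (Gt : List (List Char)) (hGt : GtSh n m Gt) :
    ∀ (fuel : Nat) (g : List (List Char)) (vis : List (Int × Int))
      (q : List (Int × Int × Int)),
    GSh n m g → GInvP n m Gt g vis → VisOkP n m Gt vis → QOk n m vis q →
    (pvABfs n m fuel g q).1 =
      pvBBfs Gt (Gt.map fun row => pvSweep row 0)
        (Gt.map fun row => ((pvSweep row.reverse 0).reverse.map fun v => m - 1 - v))
        (((PySem.List.pyRange 0 m 1).map fun x => colList Gt n x).map
          fun col => pvSweep col 0)
        (((PySem.List.pyRange 0 m 1).map fun x => colList Gt n x).map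
          fun col => ((pvSweep col.reverse 0).reverse.map fun v => n - 1 - v))
        fuel q vis ∧
    ((pvABfs n m fuel g q).1 = none →
      GSh n m (pvABfs n m fuel g q).2 ∧
      ∃ vis', GInvP n m Gt (pvABfs n m fuel g q).2 vis' ∧ VisOkP n m Gt vis' ∧
        vis ⊆ vis') := by
  intro fuel
  induction fuel with
  | zero =>
    intro g vis q hsh hinv hvok hqok
    cases q with
    | nil => exact ⟨rfl, fun _ => ⟨hsh, vis, hinv, hvok, fun a ha => ha⟩⟩
    | cons e q' => exact ⟨rfl, fun _ => ⟨hsh, vis, hinv, hvok, fun a ha => ha⟩⟩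
  | succ fuel ih =>
    intro g vis q hsh hinv hvok hqok
    cases q with
    | nil => exact ⟨rfl, fun _ => ⟨hsh, vis, hinv, hvok, fun a ha => ha⟩⟩
    | cons e q' =>
      obtain ⟨y, x, cnt⟩ := e
      obtain ⟨hyx, hb⟩ := hqok _ (List.mem_cons_self)
      have hqok' : QOk n m vis q' := fun e he => hqok e (List.mem_cons_of_mem _ he)
      have hchain := expand_chain n m y x cnt Gt hGt
        [((0, 1), (y, pvIdx2 (Gt.map fun row => pvSweep row 0) y x)),
         ((0, -1), (y, pvIdx2 (Gt.map fun row =>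
            ((pvSweep row.reverse 0).reverse.map fun v => m - 1 - v)) y x)),
         ((1, 0), (pvIdx2 (((PySem.List.pyRange 0 m 1).map fun x => colList Gt n x).map
            fun col => pvSweep col 0) x y, x)),
         ((-1, 0), (pvIdx2 (((PySem.List.pyRange 0 m 1).map fun x => colList Gt n x).map
            fun col => ((pvSweep col.reverse 0).reverse.map fun v => n - 1 - v)) x y, x))]
        g vis q' hsh hinv hvok hqok' hyx
        (by
          intro pr hpr
          simp only [List.mem_cons, List.not_mem_nil, or_false] at hpr
          rcases hpr with rfl | rfl | rfl | rfl
          · exact step_right n m y x cnt Gt hGt hb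
          · exact step_left n m y x cnt Gt hGt hb
          · exact step_down n m y x cnt Gt hGt hb
          · exact step_up n m y x cnt Gt hGt hb)
      simp only [List.map_cons, List.map_nil] at hchain
      rw [pvABfs, pvBBfs]
      rcases hA : pvADirs n m y x cnt [(0, 1), (0, -1), (1, 0), (-1, 0)] g q' with ⟨o, g2, q2⟩
      rcases hB : pvBExpand Gt cnt
        [(y, pvIdx2 (Gt.map fun row => pvSweep row 0) y x),
         (y, pvIdx2 (Gt.map fun row =>
            ((pvSweep row.reverse 0).reverse.map fun v => m - 1 - v)) y x),
         (pvIdx2 (((PySem.List.pyRange 0 m 1).map fun x => colList Gt n x).map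
            fun col => pvSweep col 0) x y, x),
         (pvIdx2 (((PySem.List.pyRange 0 m 1).map fun x => colList Gt n x).map
            fun col => ((pvSweep col.reverse 0).reverse.map fun v => n - 1 - v)) x y, x)]
        q' vis with ⟨o2, q3, vis2⟩
      rw [hA, hB] at hchain
      rw [hB]
      obtain ⟨ho, hrest⟩ := hchain
      simp only at ho
      cases o with
      | some a =>
        rw [← ho]
        exact ⟨rfl, fun hcon => absurd hcon (by simp)⟩
      | none =>
        rw [← ho]
        obtain ⟨hq, hsh2, hinv2, hvok2, hqok2, -, hsub⟩ := hrest rfl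
        simp only at hq hsh2 hinv2 hvok2 hqok2 hsub
        subst hq
        obtain ⟨heq, hnone⟩ := ih g2 vis2 q2 hsh2 hinv2 hvok2 hqok2
        refine ⟨heq, fun hn => ?_⟩
        obtain ⟨b1, vis', b2, b3, b4⟩ := hnone hn
        exact ⟨b1, vis', b2, b3, fun p hp => b4 (hsub hp)⟩

-- a list whose count of `a` is at most one holds `a` in at most one position
lemma count_le_one_pos (l : List Char) (a : Char) (h : l.count a ≤ 1) :
    ∀ i j (hi : i < l.length) (hj : j < l.length), l[i] = a → l[j] = a → i = j := by
  induction l with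
  | nil => intro i j hi; simp at hi
  | cons b t ih =>
    intro i j hi hj hia hja
    by_cases hb : b = a
    · have ht : t.count a = 0 := by
        rw [List.count_cons] at h
        simp [hb] at h
        omega
      have hnot : a ∉ t := by
        intro hcon
        have := List.count_pos_iff.mpr hcon
        omega
      cases i with
      | zero =>
        cases j with
        | zero => rfl
        | succ j' =>
          exfalso
          exact hnot (by rw [← hja]; exact List.getElem_mem (by simpa using hj))
      | succ i' =>
        exfalso
        exact hnot (by rw [← hia]; exact List.getElem_mem (by simpa using hi))
    · have ht : t.count a ≤ 1 := by
        rw [List.count_cons] at h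
        omega
      cases i with
      | zero => exact absurd hia hb
      | succ i' =>
        cases j with
        | zero => exact absurd hja hb
        | succ j' =>
          have := ih ht i' j' (by simpa using hi) (by simpa using hj)
            (by simpa using hia) (by simpa using hja)
          omega

-- two distinct entries of a Nat list cannot both be positive if the sum is ≤ 1
lemma sum_le_one_two_pos (l : List Nat) (h : l.sum ≤ 1) :
    ∀ i j (hi : i < l.length) (hj : j < l.length), i ≠ j → l[i] = 0 ∨ l[j] = 0 := by
  induction l with
  | nil => intro i j hi; simp at hi
  | cons b t ih =>
    intro i j hi hj hij
    rw [List.sum_cons] at h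
    have hzero : b ≠ 0 → ∀ k (hk : k < t.length), t[k] = 0 := by
      intro hb k hk
      have hts : t.sum = 0 := by omega
      have := List.sum_eq_zero_iff.mp hts
      exact this _ (List.getElem_mem hk)
    cases i with
    | zero =>
      cases j with
      | zero => omega
      | succ j' =>
        by_cases hb : b = 0
        · exact Or.inl hb
        · exact Or.inr (by simpa using hzero hb j' (by simpa using hj))
    | succ i' =>
      cases j with
      | zero =>
        by_cases hb : b = 0
        · exact Or.inr hb
        · exact Or.inl (by simpa using hzero hb i' (by simpa using hi))
      | succ j' =>
        have := ih (by omega) i' j' (by simpa using hi) (by simpa using hj) (by omega)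
        simpa using this

lemma GtRow_eq_getElem (n m : Int) (Gt : List (List Char)) (hGt : GtSh n m Gt)
    (i : Int) (h0 : 0 ≤ i) (hn : i < n) (hlt : i.toNat < Gt.length) :
    GtRow Gt i = Gt[i.toNat] := by
  unfold GtRow
  rw [PySem.List.pyGetD_eq_getElem Gt _ h0 (by omega)]

lemma pvGet2_eq_rowGet (n m : Int) (Gt : List (List Char)) (hGt : GtSh n m Gt)
    (i c : Int) (h0 : 0 ≤ i) (hn : i < n) :
    pvGet2 Gt i c = PySem.List.pyGet? (GtRow Gt i) c := by
  have hlt : i.toNat < Gt.length := by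
    have := hGt.1; omega
  unfold pvGet2
  rw [PySem.List.pyGet?_of_nonneg Gt h0, List.getElem?_eq_getElem hlt]
  rw [GtRow_eq_getElem n m Gt hGt i h0 hn hlt]
  rfl

lemma uniqueR (n m : Int) (Gt : List (List Char)) (hGt : GtSh n m Gt)
    (hcnt : (Gt.map fun row => row.count 'R').sum ≤ 1)
    (sy sx i j : Int) (h1 : InB4 n m sy sx) (h2 : InB4 n m i j)
    (hR1 : pvGet2 Gt sy sx = some 'R') (hR2 : pvGet2 Gt i j = some 'R') :
    sy = i ∧ sx = j := by
  obtain ⟨hsy0, hsyn, hsx0, hsxm⟩ := h1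
  obtain ⟨hi0, hin, hj0, hjm⟩ := h2
  obtain ⟨hlen, hrow⟩ := hGt
  have hlt1 : sy.toNat < Gt.length := by omega
  have hlt2 : i.toNat < Gt.length := by omega
  have hr1len : (Gt[sy.toNat]).length = m.toNat := by
    have := hrow _ (List.getElem_mem hlt1); omega
  have hr2len : (Gt[i.toNat]).length = m.toNat := by
    have := hrow _ (List.getElem_mem hlt2); omega
  have hg1 : (Gt[sy.toNat])[sx.toNat]'(by omega) = 'R' := by
    have := pvGet2_row n m Gt ⟨hlen, hrow⟩ sy sx ⟨hsy0, hsyn, hsx0, hsxm⟩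
    rw [hR1] at this
    rw [GtRow_eq_getElem n m Gt ⟨hlen, hrow⟩ sy hsy0 hsyn hlt1] at this
    rw [List.getD_eq_getElem _ _ (by omega)] at this
    exact (Option.some_inj.mp this).symm
  have hg2 : (Gt[i.toNat])[j.toNat]'(by omega) = 'R' := by
    have := pvGet2_row n m Gt ⟨hlen, hrow⟩ i j ⟨hi0, hin, hj0, hjm⟩
    rw [hR2] at this
    rw [GtRow_eq_getElem n m Gt ⟨hlen, hrow⟩ i hi0 hin hlt2] at this
    rw [List.getD_eq_getElem _ _ (by omega)] at this
    exact (Option.some_inj.mp this).symm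
  by_cases hyy : sy.toNat = i.toNat
  · have hsyi : sy = i := by omega
    subst hsyi
    have hcmem : (Gt[sy.toNat]).count 'R' ∈ Gt.map fun row => row.count 'R' := by
      have : (Gt.map fun row => row.count 'R')[sy.toNat]'(by simpa using hlt1) =
          (Gt[sy.toNat]).count 'R' := List.getElem_map _
      rw [← this]
      exact List.getElem_mem _
    have hle : (Gt[sy.toNat]).count 'R' ≤ 1 :=
      le_trans (List.le_sum_of_mem hcmem) hcnt
    have := count_le_one_pos (Gt[sy.toNat]) 'R' hle sx.toNat j.toNat
      (by omega) (by omega) hg1 (by rw [← hg2])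
    exact ⟨rfl, by omega⟩
  · exfalso
    have hmap : ∀ k (hk : k < Gt.length),
        (Gt.map fun row => row.count 'R')[k]'(by simpa using hk) = (Gt[k]).count 'R' :=
      fun k hk => List.getElem_map _
    have h0 := sum_le_one_two_pos (Gt.map fun row => row.count 'R') hcnt
      sy.toNat i.toNat (by simpa using hlt1) (by simpa using hlt2) hyy
    rw [hmap _ hlt1, hmap _ hlt2] at h0
    have hp1 : 0 < (Gt[sy.toNat]).count 'R' :=
      List.count_pos_iff.mpr (by rw [← hg1]; exact List.getElem_mem _)
    have hp2 : 0 < (Gt[i.toNat]).count 'R' :=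
      List.count_pos_iff.mpr (by rw [← hg2]; exact List.getElem_mem _)
    rcases h0 with h | h <;> omega

-- A's outer scan returns -1 once no reachable cell holds 'R'
lemma scan_noR (n m : Int) (g : List (List Char)) :
    ∀ (cells : List (Int × Int)), (∀ p ∈ cells, pvGet2 g p.1 p.2 ≠ some 'R') →
    pvAScan n m cells g = -1 := by
  intro cells
  induction cells with
  | nil => intro _; rfl
  | cons p rest ih =>
    intro h
    obtain ⟨i, j⟩ := p
    rw [pvAScan, if_neg (h _ List.mem_cons_self)]
    exact ih (fun p hp => h p (List.mem_cons_of_mem _ hp))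

-- B's answer once the robot cell is known
def fireB (n m : Int) (Gt : List (List Char)) (sy sx : Int) : Int :=
  match pvBBfs Gt (Gt.map fun row => pvSweep row 0)
      (Gt.map fun row => ((pvSweep row.reverse 0).reverse.map fun v => m - 1 - v))
      (((PySem.List.pyRange 0 m 1).map fun x => colList Gt n x).map
        fun col => pvSweep col 0)
      (((PySem.List.pyRange 0 m 1).map fun x => colList Gt n x).map
        fun col => ((pvSweep col.reverse 0).reverse.map fun v => n - 1 - v))
      (n.toNat * m.toNat + 1) [(sy, sx, 0)]
      (PySem.Set.add PySem.Set.empty (sy, sx)) with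
  | some a => a
  | none => -1

lemma fire_eq (n m : Int) (G0 Gt : List (List Char)) (hsh0 : GSh n m G0)
    (hGt : GtSh n m Gt)
    (htrim : ∀ r c, InB4 n m r c → pvGet2 G0 r c = pvGet2 Gt r c)
    (sy sx : Int) (hb : InB4 n m sy sx)
    (hRg : pvGet2 Gt sy sx = some 'R')
    (hnoR : ∀ p : Int × Int, InB4 n m p.1 p.2 → p ≠ (sy, sx) →
      pvGet2 Gt p.1 p.2 ≠ some 'R')
    (rest : List (Int × Int)) (hrest : ∀ p ∈ rest, InB4 n m p.1 p.2) :
    (match pvABfs n m (n.toNat * m.toNat + 1) (pvSet2 G0 sy sx 'V') [(sy, sx, 0)] with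
     | (some a, _) => a
     | (none, g2) => pvAScan n m rest g2) = fireB n m Gt sy sx := by
  have hsh1 : GSh n m (pvSet2 G0 sy sx 'V') := pvSet2_gsh n m G0 hsh0 sy sx hb 'V'
  have hinv1 : GInvP n m Gt (pvSet2 G0 sy sx 'V') [(sy, sx)] := by
    intro r c h
    rw [pvSet2_get2 n m G0 hsh0 sy sx hb 'V' r c h]
    by_cases he : r = sy ∧ c = sx
    · rw [if_pos he, if_pos (by rw [List.mem_singleton, Prod.ext_iff]; exact he)]
    · rw [if_neg he, if_neg (by
        rw [List.mem_singleton, Prod.ext_iff]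
        exact he), htrim r c h]
  have hvok1 : VisOkP n m Gt [(sy, sx)] := by
    intro p hp
    rw [List.mem_singleton] at hp
    subst hp
    exact ⟨hb, Or.inr hRg⟩
  have hqok1 : QOk n m [(sy, sx)] [(sy, sx, 0)] := by
    intro e he
    rw [List.mem_singleton] at he
    subst he
    exact ⟨by simp, hb⟩
  obtain ⟨heq, hnone⟩ := bfs_lockstep n m Gt hGt (n.toNat * m.toNat + 1)
    (pvSet2 G0 sy sx 'V') [(sy, sx)] [(sy, sx, 0)] hsh1 hinv1 hvok1 hqok1
  unfold fireB
  have hvadd : PySem.Set.add (PySem.Set.empty : PySem.Set (Int × Int)) (sy, sx) =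
      [(sy, sx)] := rfl
  rw [hvadd]
  rcases hA : pvABfs n m (n.toNat * m.toNat + 1) (pvSet2 G0 sy sx 'V') [(sy, sx, 0)]
    with ⟨o, g2⟩
  rw [hA] at heq hnone
  simp only at heq hnone
  cases o with
  | some a => rw [← heq]
  | none =>
    rw [← heq]
    obtain ⟨hsh2, vis', hinv2, hvok2, hsub⟩ := hnone rfl
    exact scan_noR n m g2 rest (by
      intro p hp
      rw [hinv2 p.1 p.2 (hrest p hp)]
      by_cases hm : (p.1, p.2) ∈ vis'
      · rw [if_pos hm]; intro hcon; exact absurd (Option.some_inj.mp hcon) (by decide)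
      · rw [if_neg hm]
        refine hnoR p (hrest p hp) ?_
        intro hcon
        subst hcon
        exact hm (hsub (by simp)))

-- aligning A's scan of one row with B's inner search loop
lemma scanRow_align (n m : Int) (G0 Gt : List (List Char)) (hsh0 : GSh n m G0)
    (hGt : GtSh n m Gt)
    (htrim : ∀ r c, InB4 n m r c → pvGet2 G0 r c = pvGet2 Gt r c)
    (hcnt : (Gt.map fun row => row.count 'R').sum ≤ 1)
    (i : Int) (hi : 0 ≤ i ∧ i < n) :
    ∀ (xs : List Int), (∀ x ∈ xs, 0 ≤ x ∧ x < m) →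
    ∀ (rest : List (Int × Int)), (∀ p ∈ rest, InB4 n m p.1 p.2) →
    pvAScan n m ((xs.map fun j => (i, j)) ++ rest) G0 =
      (match pvBFindX (GtRow Gt i) xs with
       | some sx => fireB n m Gt i sx
       | none => pvAScan n m rest G0) := by
  intro xs
  induction xs with
  | nil =>
    intro _ rest _
    rw [pvBFindX]
    rfl
  | cons x xs' ih =>
    intro hxs rest hrest
    have hx := hxs x List.mem_cons_self
    have hbx : InB4 n m i x := ⟨hi.1, hi.2, hx.1, hx.2⟩
    have hget : PySem.List.pyGet? (GtRow Gt i) x = pvGet2 Gt i x :=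
      (pvGet2_eq_rowGet n m Gt hGt i x hi.1 hi.2).symm
    rw [List.map_cons, List.cons_append, pvAScan, pvBFindX, hget]
    by_cases hR : pvGet2 Gt i x = some 'R'
    · rw [if_pos (by rw [htrim i x hbx]; exact hR), if_pos hR]
      exact fire_eq n m G0 Gt hsh0 hGt htrim i x hbx hR
        (by
          intro p hp hne
          intro hcon
          obtain ⟨he1, he2⟩ := uniqueR n m Gt hGt hcnt i x p.1 p.2 hbx hp hR hcon
          exact hne (by rw [Prod.ext_iff]; exact ⟨he1.symm, he2.symm⟩))
        ((xs'.map fun j => (i, j)) ++ rest)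
        (by
          intro p hp
          rcases List.mem_append.mp hp with hp | hp
          · obtain ⟨j, hj, hpe⟩ := List.mem_map.mp hp
            subst hpe
            have := hxs j (List.mem_cons_of_mem _ hj)
            exact ⟨hi.1, hi.2, this.1, this.2⟩
          · exact hrest p hp)
    · rw [if_neg (by rw [htrim i x hbx]; exact hR), if_neg hR]
      exact ih (fun x' hx' => hxs x' (List.mem_cons_of_mem _ hx')) rest hrest

-- aligning A's whole scan with B's robot search
lemma scan_find (n m : Int) (G0 Gt : List (List Char)) (hsh0 : GSh n m G0)
    (hGt : GtSh n m Gt)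
    (htrim : ∀ r c, InB4 n m r c → pvGet2 G0 r c = pvGet2 Gt r c)
    (hcnt : (Gt.map fun row => row.count 'R').sum ≤ 1) :
    ∀ (ys : List Int), (∀ y ∈ ys, 0 ≤ y ∧ y < n) →
    pvAScan n m (ys.flatMap fun i => (PySem.List.pyRange 0 m 1).map fun j => (i, j)) G0 =
      (match pvBFindY Gt m ys with
       | some (sy, sx) => fireB n m Gt sy sx
       | none => -1) := by
  intro ys
  induction ys with
  | nil =>
    intro _
    rw [pvBFindY]
    rfl
  | cons y ys' ih =>
    intro hys
    have hy := hys y List.mem_cons_self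
    rw [List.flatMap_cons, pvBFindY]
    have hrow := scanRow_align n m G0 Gt hsh0 hGt htrim hcnt y hy
      (PySem.List.pyRange 0 m 1)
      (fun x hx => (PySem.List.mem_pyRange_one.mp hx))
      (ys'.flatMap fun i => (PySem.List.pyRange 0 m 1).map fun j => (i, j))
      (by
        intro p hp
        obtain ⟨i, hi, hpm⟩ := List.mem_flatMap.mp hp
        obtain ⟨j, hj, hpe⟩ := List.mem_map.mp hpm
        subst hpe
        have h1 := hys i (List.mem_cons_of_mem _ hi)
        have h2 := PySem.List.mem_pyRange_one.mp hj
        exact ⟨h1.1, h1.2, h2.1, h2.2⟩)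
    rw [hrow]
    have hgr : PySem.List.pyGetD Gt y ([] : List Char) = GtRow Gt y := rfl
    rw [hgr]
    cases hfx : pvBFindX (GtRow Gt y) (PySem.List.pyRange 0 m 1) with
    | some sx => rfl
    | none => exact ih (fun y' hy' => hys y' (List.mem_cons_of_mem _ hy'))

-- ===== VERDICT (by name: the statement is the Claim_ definition above) =====
theorem solution_spec : Claim_equal_solution := by
  unfold Claim_equal_solution
  intro board hdom hpre
  unfold Spec_solution
  obtain ⟨hne, hrows, hcnt⟩ := hpre
  obtain ⟨b0, brest, rfl⟩ := List.exists_cons_of_ne_nil hne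
  have hb0 : PySem.List.pyGetD (b0 :: brest) 0 "" = b0 := by
    rw [PySem.List.pyGetD_zero_cons]
  have hhead : (b0 :: brest).headD "" = b0 := rfl
  rw [hhead] at hrows hcnt
  have hml : PySem.Str.len b0 = (b0.toList.length : Int) := PySem.Str.len_eq b0
  have hnl : PySem.List.len (b0 :: brest) = ((b0 :: brest).length : Int) :=
    PySem.List.len_eq _
  -- name the two grids
  set nI : Int := ((b0 :: brest).length : Int) with hnI
  set mI : Int := (b0.toList.length : Int) with hmI
  set G0 : List (List Char) := (b0 :: brest).map String.toList with hG0
  set Gt : List (List Char) :=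
    (b0 :: brest).map fun row => PySem.List.slice row.toList none (some mI) with hGt
  have hm0 : 0 ≤ mI := by rw [hmI]; omega
  have hGtrow : ∀ row : String, row ∈ b0 :: brest →
      PySem.List.slice row.toList none (some mI) = row.toList.take b0.toList.length := by
    intro row _
    rw [PySem.List.slice_to _ hm0, hmI]
    simp
  have hsh0 : GSh nI mI G0 := by
    constructor
    · rw [hG0, List.length_map]
    · intro row hrow
      obtain ⟨s, hs, rfl⟩ := List.mem_map.mp hrow
      have := hrows s hs
      omega
  have hGtsh : GtSh nI mI Gt := by
    constructor
    · rw [hGt, List.length_map]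
    · intro row hrow
      obtain ⟨s, hs, rfl⟩ := List.mem_map.mp hrow
      rw [hGtrow s hs, List.length_take]
      have := hrows s hs
      omega
  have htrim : ∀ r c : Int, InB4 nI mI r c → pvGet2 G0 r c = pvGet2 Gt r c := by
    intro r c h
    obtain ⟨hr0, hrn, hc0, hcm⟩ := h
    have hrlt : r.toNat < (b0 :: brest).length := by omega
    unfold pvGet2
    rw [PySem.List.pyGet?_of_nonneg _ hr0, PySem.List.pyGet?_of_nonneg _ hr0]
    rw [hG0, hGt]
    rw [List.getElem?_map, List.getElem?_map, List.getElem?_eq_getElem hrlt]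
    simp only [Option.map_some, Option.bind_some]
    rw [hGtrow _ (List.getElem_mem hrlt)]
    rw [PySem.List.pyGet?_of_nonneg _ hc0, PySem.List.pyGet?_of_nonneg _ hc0]
    rw [List.getElem?_take_of_lt (by omega)]
  have hcntG : (Gt.map fun row => row.count 'R').sum ≤ 1 := by
    have hmm : Gt.map (fun row => row.count 'R') =
        (b0 :: brest).map fun row => (row.toList.take b0.toList.length).count 'R' := by
      rw [hGt, List.map_map]
      exact List.map_congr_left fun s hs => by
        simp only [Function.comp_apply]
        rw [hGtrow s hs]
    rw [hmm]
    exact hcnt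
  have hmain := scan_find nI mI G0 Gt hsh0 hGtsh htrim hcntG
    (PySem.List.pyRange 0 nI 1)
    (fun y hy => PySem.List.mem_pyRange_one.mp hy)
  show pvAScan (PySem.List.len (b0 :: brest))
      (PySem.Str.len (PySem.List.pyGetD (b0 :: brest) 0 ""))
      ((PySem.List.pyRange 0 (PySem.List.len (b0 :: brest)) 1).flatMap fun i =>
        (PySem.List.pyRange 0 (PySem.Str.len (PySem.List.pyGetD (b0 :: brest) 0 "")) 1).map
          fun j => (i, j)) ((b0 :: brest).map String.toList) = _
  rw [hb0, hml, hnl]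
  rw [hmain]
  show _ = solution_alt (b0 :: brest)
  unfold solution_alt
  simp only [hb0, hml, hnl]
  rw [← hGt]
  cases hf : pvBFindY Gt mI (PySem.List.pyRange 0 nI 1) with
  | none => rfl
  | some p =>
    obtain ⟨sy, sx⟩ := p
    unfold fireB colList
    rfl
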